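-- pv_equiv track=rewrite | github.com/HyunbeenLim/algorithm | Programmers/지게차.py | solution
-- ===== SOURCE A (Python) =====
-- from collections import deque
--
-- def make_matrix(lst):
--     N = len(lst)
--     M = len(lst[0])
--
--     matrix = [[0] * (M+2) for _ in range(N+2)]
--
--     for i in range(1, N+1):
--         for j in range(1, M+1):
--             matrix[i][j] = lst[i-1][j-1]
--
--     return {
--         'matrix': matrix,
--         'N': N,
--         'M': M
--     }
--
-- dr = [0, 1, 0, -1]
--
-- dc = [1, 0, -1, 0]
--
-- def search(matrix, order, N, M):
--     cnt = 0
--     ## 길이가 1일 때 => 외부 접촉 컨테이너만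
--     if len(order) == 1:
--         q = deque()
--         visited = [[0] * (M+2) for _ in range(N+2)]
--
--         q.append((0, 0))
--         visited[0][0] = 1
--
--         container_to_take = deque()         # 외부와 접촉된 컨테이너들
--
--         while q:
--             r, c = q.popleft()
--
--             for m in range(4):
--                 nr = r + dr[m]
--                 nc = c + dc[m]
--                 if (0 <= nr < N + 2) and (0 <= nc < M + 2) and not visited[nr][nc]:
--                     visited[nr][nc] = 1
--                     if matrix[nr][nc] == order:
--                         container_to_take.append((nr, nc))
--                     elif matrix[nr][nc] == 0:
--                         q.append((nr, nc))
--
--         while container_to_take: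
--             r, c = container_to_take.popleft()
--             matrix[r][c] = 0
--             cnt += 1
--
--         return {
--             'matrix': matrix,
--             'cnt': cnt
--         }
--
--     ## 길이 2일 때 => 모든 컨테이너
--     else:
--         for r in range(1, N+1):
--             for c in range(1, M+1):
--                 if matrix[r][c] == order[0]:
--                     matrix[r][c] = 0
--                     cnt += 1
--
--         return {
--             'matrix': matrix,
--             'cnt': cnt
--         }
--
-- def solution(storage, requests):
--     temp = make_matrix(storage)
--     storage_matrix = temp['matrix']
--
--     N = temp['N']
--     M = temp['M']
--
--     count = N * M
--
--     for request in requests: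
--         take_container = search(storage_matrix, request, N, M)
--         storage_matrix = take_container['matrix']
--         count -= take_container['cnt']
--
--     return count
-- ===== SOURCE B (Python) =====
-- def _neighbors(p):
--     r, c = p
--     return ((r, c + 1), (r + 1, c), (r, c - 1), (r - 1, c))
--
--
-- def solution(storage, requests):
--     N, M = len(storage), len(storage[0])
--     grid = {(r, c): storage[r][c] for r in range(N) for c in range(M)}
--     # 'outside' = empty cells of the padded box connected to the border.
--     # Initially the grid is full, so that is exactly the surrounding ring.
--     outside = {(r, c) for r in range(-1, N + 1) for c in range(-1, M + 1)
--                if r == -1 or r == N or c == -1 or c == M}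
--     for req in requests:
--         ch = req[0]
--         if len(req) == 1:
--             removed = [p for p, v in grid.items()
--                        if v == ch and any(q in outside for q in _neighbors(p))]
--         else:
--             removed = [p for p, v in grid.items() if v == ch]
--         for p in removed:
--             del grid[p]
--         # grow the outside region through the newly emptied cells
--         stack = [p for p in removed if any(q in outside for q in _neighbors(p))]
--         outside.update(stack)
--         while stack:
--             p = stack.pop()
--             for q in _neighbors(p):
--                 r, c = q
--                 if -1 <= r <= N and -1 <= c <= M and q not in outside and q not in grid:
--                     outside.add(q)
--                     stack.append(q)
--     return len(grid)
-- ===== Notes on version B (the rewrite author's own statement) =====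
-- stated objective: faster
-- what changed: Instead of rebuilding a padded matrix copy of the state and running a fresh whole-grid BFS (with a freshly allocated visited matrix) for every request, B keeps the remaining containers in one dict and incrementally maintains the set of outside-connected empty cells, so each request only scans the remaining containers and flood-fills the newly exposed cells; intended as faster, a timing run measured 3.2x/40x/123x at n=64/256/1024 but could not confirm the largest size (A finished only one input there).
-- outside the precondition, e.g. on solution([''], ['']): A returns 0, B raises IndexError
import Mathlib
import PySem

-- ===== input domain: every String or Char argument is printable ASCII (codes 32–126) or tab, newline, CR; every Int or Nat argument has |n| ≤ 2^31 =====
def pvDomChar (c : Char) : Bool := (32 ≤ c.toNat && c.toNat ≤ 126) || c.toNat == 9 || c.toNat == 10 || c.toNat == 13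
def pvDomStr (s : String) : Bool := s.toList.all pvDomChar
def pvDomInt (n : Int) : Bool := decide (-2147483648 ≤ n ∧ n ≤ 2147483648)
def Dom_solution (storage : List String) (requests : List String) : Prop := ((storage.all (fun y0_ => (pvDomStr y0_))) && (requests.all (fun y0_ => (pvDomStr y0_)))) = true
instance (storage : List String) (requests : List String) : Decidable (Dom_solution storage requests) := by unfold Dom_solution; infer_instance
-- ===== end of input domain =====

-- B replaces A's per-request whole-grid BFS rescan by one container dict plus an
-- incrementally maintained outside region; intended as faster (a timing run
-- measured 3.2x-123x on its sizes, unconfirmed at the largest size).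

-- shared primitive: the four neighbours in A's (dr, dc) order = B's _neighbors order
def pvNbrs (p : Int × Int) : List (Int × Int) :=
  [(p.1, p.2 + 1), (p.1 + 1, p.2), (p.1, p.2 - 1), (p.1 - 1, p.2)]

-- shared primitive: storage[i][j] (none exactly where Python raises IndexError)
def pvCellAt (storage : List String) (i j : Int) : Option Char :=
  match PySem.List.pyGet? storage i with
  | some s => PySem.Str.pyGet? s j
  | none => none

-- ===== PORT A =====
-- A's padded (N+2)×(M+2) matrix is modelled as a total function: cell 0 ↦ none,
-- a container character ↦ some ch; index assignment ↦ pointwise update.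
def pvMkMatrix (storage : List String) (N M : Int) : (Int × Int) → Option Char :=
  fun p =>
    if 1 ≤ p.1 ∧ p.1 ≤ N ∧ 1 ≤ p.2 ∧ p.2 ≤ M then pvCellAt storage (p.1 - 1) (p.2 - 1)
    else none

-- A's BFS (the visited matrix is modelled as the list of marked coordinates;
-- the deque q pops at the front and appends at the back, exactly as deque does).
-- The while loop gets fuel; A's caller passes enough fuel for it never to run out
-- (proved below), so the fuel-exhaustion branch is unreachable.
-- the body of A's inner `for m in range(4)` loop: mark, then collect / enqueue
def pvBfsStep (mtx : (Int × Int) → Option Char) (order : String) (N M : Int)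
    (st : List (Int × Int) × List (Int × Int) × List (Int × Int)) (np : Int × Int) :
    List (Int × Int) × List (Int × Int) × List (Int × Int) :=
  if (0 ≤ np.1 ∧ np.1 < N + 2 ∧ 0 ≤ np.2 ∧ np.2 < M + 2) ∧ np ∉ st.2.1 then
    match mtx np with
    | some ch =>
      if order == String.ofList [ch] then (st.1, np :: st.2.1, st.2.2 ++ [np])
      else (st.1, np :: st.2.1, st.2.2)
    | none => (st.1 ++ [np], np :: st.2.1, st.2.2)
  else st

def pvBfsA (mtx : (Int × Int) → Option Char) (order : String) (N M : Int) :
    Nat → List (Int × Int) → List (Int × Int) → List (Int × Int) → List (Int × Int)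
  | 0, _, _, coll => coll
  | _ + 1, [], _, coll => coll
  | fuel + 1, p :: q, vis, coll =>
    let st := (pvNbrs p).foldl (pvBfsStep mtx order N M) (q, vis, coll)
    pvBfsA mtx order N M fuel st.1 st.2.1 st.2.2

-- A's search: returns the updated matrix and cnt
def pvSearchA (mtx : (Int × Int) → Option Char) (order : String) (N M : Int) :
    ((Int × Int) → Option Char) × Int :=
  if PySem.Str.len order == 1 then
    let coll := pvBfsA mtx order N M (((N + 2) * (M + 2)).toNat + 1) [(0, 0)] [(0, 0)] []
    (fun p => if p ∈ coll then none else mtx p, (coll.length : Int))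
  else
    match order.toList with
    | [] => (mtx, 0)   -- Python raises IndexError here (order = ""): excluded by Pre_
    | c0 :: _ =>
      (PySem.List.pyRange 1 (N + 1) 1).foldl (fun st r =>
        (PySem.List.pyRange 1 (M + 1) 1).foldl
          (fun (st : ((Int × Int) → Option Char) × Int) c =>
            if st.1 (r, c) == some c0 then
              (fun p => if p = (r, c) then none else st.1 p, st.2 + 1)
            else st) st) (mtx, 0)

def solution (storage : List String) (requests : List String) : Int :=
  let N : Int := storage.length
  let M : Int := match storage with
    | [] => 0        -- Python raises IndexError on storage = []: excluded by Pre_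
    | s :: _ => PySem.Str.len s
  let mtx := pvMkMatrix storage N M
  let st := requests.foldl (fun (st : ((Int × Int) → Option Char) × Int) req =>
    let res := pvSearchA st.1 req N M
    (res.1, st.2 - res.2)) (mtx, N * M)
  st.2

-- ===== PORT B =====
-- grid = {(r, c): storage[r][c] for r in range(N) for c in range(M)}
def pvGridInit (storage : List String) (N M : Int) : PySem.Dict (Int × Int) Char :=
  (PySem.List.pyRange 0 N 1).foldl (fun d r =>
    (PySem.List.pyRange 0 M 1).foldl (fun (d : PySem.Dict (Int × Int) Char) c =>
      match pvCellAt storage r c with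
      | some ch => d.insert (r, c) ch
      | none => d) d) PySem.Dict.empty   -- none only where Python raises: excluded by Pre_

-- the initial outside region: the surrounding ring of the padded box
def pvRing (N M : Int) : PySem.Set (Int × Int) :=
  PySem.Set.ofList ((PySem.List.pyRange (-1) (N + 1) 1).flatMap (fun r =>
    (PySem.List.pyRange (-1) (M + 1) 1).filterMap (fun c =>
      if r = -1 ∨ r = N ∨ c = -1 ∨ c = M then some (r, c) else none)))

-- the body of B's inner `for q in _neighbors(p)` loop: add newly exposed empty cells
def pvGrowStep (grid : PySem.Dict (Int × Int) Char) (N M : Int)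
    (s : List (Int × Int) × PySem.Set (Int × Int)) (q : Int × Int) :
    List (Int × Int) × PySem.Set (Int × Int) :=
  if (-1 ≤ q.1 ∧ q.1 ≤ N ∧ -1 ≤ q.2 ∧ q.2 ≤ M) ∧ PySem.Set.contains s.2 q = false ∧
      grid.contains q = false then
    (s.1 ++ [q], PySem.Set.add s.2 q)
  else s

-- B's while loop: pop from the back of the stack, push newly exposed empty cells.
-- Fuel as in pvBfsA: the caller passes enough for it never to run out (proved below).
def pvGrow (grid : PySem.Dict (Int × Int) Char) (N M : Int) :
    Nat → List (Int × Int) → PySem.Set (Int × Int) → PySem.Set (Int × Int)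
  | 0, _, out => out
  | _ + 1, [], out => out
  | fuel + 1, x :: xs, out =>
    let p := (x :: xs).getLast (by simp)
    let s2 := (pvNbrs p).foldl (pvGrowStep grid N M) ((x :: xs).dropLast, out)
    pvGrow grid N M fuel s2.1 s2.2

-- one request step of B
def pvStepB (N M : Int) (st : PySem.Dict (Int × Int) Char × PySem.Set (Int × Int))
    (req : String) : PySem.Dict (Int × Int) Char × PySem.Set (Int × Int) :=
  match req.toList with
  | [] => st   -- Python raises IndexError here (req = ""): excluded by Pre_
  | ch :: _ =>
    let grid := st.1
    let outside := st.2
    let removed :=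
      if PySem.Str.len req == 1 then
        (grid.items.filter (fun pv =>
          pv.2 == ch && (pvNbrs pv.1).any (fun q => PySem.Set.contains outside q))).map (·.1)
      else
        (grid.items.filter (fun pv => pv.2 == ch)).map (·.1)
    let grid' := removed.foldl (fun d p => d.erase p) grid
    let stack := removed.filter (fun p => (pvNbrs p).any (fun q => PySem.Set.contains outside q))
    let outside' := PySem.Set.update outside stack
    (grid', pvGrow grid' N M (((N + 2) * (M + 2)).toNat + 1) stack outside')

def solution_alt (storage : List String) (requests : List String) : Int :=
  let N : Int := storage.length
  let M : Int := match storage with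
    | [] => 0        -- Python raises IndexError on storage = []: excluded by Pre_
    | s :: _ => PySem.Str.len s
  let final := requests.foldl (pvStepB N M) (pvGridInit storage N M, pvRing N M)
  (PySem.Dict.size final.1 : Int)

-- ===== PRECONDITION & SPEC =====
-- Pre_ excludes the inputs where A raises: empty storage (IndexError on storage[0]),
-- a row shorter than the first row (IndexError while copying), and an empty request
-- string (IndexError on order[0]); on a zero-area grid A happens to survive an empty
-- request (its sweep loop never reads order[0]) while B's natural req[0] raises, so
-- those degenerate inputs are excluded too.
def Pre_solution (storage : List String) (requests : List String) : Prop :=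
  storage ≠ [] ∧
  (∀ s ∈ storage, PySem.Str.len (storage.headD "") ≤ PySem.Str.len s) ∧
  (∀ r ∈ requests, r ≠ "")
instance (storage : List String) (requests : List String) : Decidable (Pre_solution storage requests) := by
  unfold Pre_solution; infer_instance

def pvWitness_solution : List String × List String := (["AB", "BB"], ["A", "B"])

def Spec_solution (storage : List String) (requests : List String) (out : Int) : Prop := out = solution_alt storage requests
instance (storage : List String) (requests : List String) (out : Int) : Decidable (Spec_solution storage requests out) := by unfold Spec_solution; infer_instance

-- ===== CLAIM (what is proved, stated in full; the proofs are below) =====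
def Claim_equal_solution : Prop := ∀ (storage : List String) (requests : List String), Dom_solution storage requests → Pre_solution storage requests → Spec_solution storage requests (solution storage requests)

-- ===== LEMMAS AND PROOFS =====

/- ---------- coordinate basics ---------- -/

def pvSh (x : Int × Int) : Int × Int := (x.1 + 1, x.2 + 1)
def pvUnsh (x : Int × Int) : Int × Int := (x.1 - 1, x.2 - 1)

@[simp] theorem pvSh_unsh (x : Int × Int) : pvSh (pvUnsh x) = x := by
  simp [pvSh, pvUnsh]

@[simp] theorem pvUnsh_sh (x : Int × Int) : pvUnsh (pvSh x) = x := by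
  simp [pvSh, pvUnsh]

theorem pvSh_inj {x y : Int × Int} (h : pvSh x = pvSh y) : x = y := by
  have := congrArg pvUnsh h; simpa using this

-- A-side (padded, 1-based) bounds, inner region, and B-side bounds
abbrev pvInb (N M : Int) (p : Int × Int) : Prop :=
  0 ≤ p.1 ∧ p.1 < N + 2 ∧ 0 ≤ p.2 ∧ p.2 < M + 2
abbrev pvInnerA (N M : Int) (p : Int × Int) : Prop :=
  1 ≤ p.1 ∧ p.1 ≤ N ∧ 1 ≤ p.2 ∧ p.2 ≤ M
abbrev pvInbB (N M : Int) (q : Int × Int) : Prop :=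
  -1 ≤ q.1 ∧ q.1 ≤ N ∧ -1 ≤ q.2 ∧ q.2 ≤ M

theorem pvInbB_iff (N M : Int) (x : Int × Int) : pvInbB N M x ↔ pvInb N M (pvSh x) := by
  simp [pvInbB, pvInb, pvSh]; omega

theorem pvNbrs_symm {p q : Int × Int} : p ∈ pvNbrs q ↔ q ∈ pvNbrs p := by
  simp [pvNbrs, Prod.ext_iff]; omega

theorem pvNbrs_sh (x : Int × Int) : pvNbrs (pvSh x) = (pvNbrs x).map pvSh := by
  simp [pvNbrs, pvSh]

/- ---------- step-1 ranges, box enumerations ---------- -/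

theorem pvRange_len (a b : Int) : (PySem.List.pyRange a b).length = (b - a).toNat := by
  have H : ∀ n : Nat, ∀ a b : Int, (b - a).toNat = n → (PySem.List.pyRange a b).length = n := by
    intro n
    induction n with
    | zero => intro a b h; rw [PySem.List.pyRange_one_eq_nil (by omega)]; rfl
    | succ k ih =>
      intro a b h
      rw [PySem.List.pyRange_one_cons (by omega)]
      simp [ih (a + 1) b (by omega)]
  exact H _ a b rfl

theorem pvRange_nodup (a b : Int) : (PySem.List.pyRange a b).Nodup := by
  have H : ∀ n : Nat, ∀ a b : Int, (b - a).toNat = n → (PySem.List.pyRange a b).Nodup := by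
    intro n
    induction n with
    | zero => intro a b h; rw [PySem.List.pyRange_one_eq_nil (by omega)]; exact List.nodup_nil
    | succ k ih =>
      intro a b h
      rw [PySem.List.pyRange_one_cons (by omega)]
      refine List.nodup_cons.2 ⟨?_, ih (a + 1) b (by omega)⟩
      intro hmem
      have := PySem.List.mem_pyRange_one.1 hmem
      omega
  exact H _ a b rfl

def pvBoxList (N M : Int) : List (Int × Int) :=
  (PySem.List.pyRange 0 (N + 2)).flatMap (fun r =>
    (PySem.List.pyRange 0 (M + 2)).map (fun c => (r, c)))

theorem mem_pvBoxList {N M : Int} {x : Int × Int} : x ∈ pvBoxList N M ↔ pvInb N M x := by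
  simp only [pvBoxList, List.mem_flatMap, List.mem_map, PySem.List.mem_pyRange_one, pvInb]
  constructor
  · rintro ⟨r, hr, c, hc, rfl⟩; exact ⟨hr.1, hr.2, hc.1, hc.2⟩
  · rintro ⟨h1, h2, h3, h4⟩; exact ⟨x.1, ⟨h1, h2⟩, x.2, ⟨h3, h4⟩, rfl⟩

theorem length_pvBoxList {N M : Int} (hN : 0 ≤ N) (hM : 0 ≤ M) :
    (pvBoxList N M).length = ((N + 2) * (M + 2)).toNat := by
  have h1 : (pvBoxList N M).length = (N + 2).toNat * (M + 2).toNat := by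
    simp only [pvBoxList, List.length_flatMap, List.length_map, pvRange_len]
    rw [List.map_const', List.sum_replicate, pvRange_len]
    simp
  rw [h1, Int.toNat_mul (by omega) (by omega)]

-- a Nodup list of in-bounds cells is no longer than the box
theorem pvNodup_le_box {N M : Int} (hN : 0 ≤ N) (hM : 0 ≤ M) {l : List (Int × Int)}
    (h : l.Nodup) (hsub : ∀ x ∈ l, pvInb N M x) :
    l.length ≤ ((N + 2) * (M + 2)).toNat := by
  have := (h.subperm (l₂ := pvBoxList N M) (fun x hx => mem_pvBoxList.2 (hsub x hx))).length_le
  rwa [length_pvBoxList hN hM] at this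

/- ---------- the outside-reachability relation (stated on A's padded coordinates) ---------- -/

inductive pvZ (mtx : (Int × Int) → Option Char) (N M : Int) : (Int × Int) → Prop
  | base : pvZ mtx N M (0, 0)
  | step (q p : Int × Int) : pvZ mtx N M q → p ∈ pvNbrs q → pvInb N M p → mtx p = none →
      pvZ mtx N M p

theorem pvZ_inb {mtx N M p} (hN : 0 ≤ N) (hM : 0 ≤ M) (h : pvZ mtx N M p) : pvInb N M p := by
  cases h with
  | base => exact ⟨le_refl _, by omega, le_refl _, by omega⟩
  | step q p _ _ hi _ => exact hi

theorem pvZ_none {mtx : (Int × Int) → Option Char} {N M p} (h00 : mtx (0, 0) = none)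
    (h : pvZ mtx N M p) : mtx p = none := by
  cases h with
  | base => exact h00
  | step q p _ _ _ he => exact he

theorem pvZ_mono {mtx mtx' : (Int × Int) → Option Char} {N M p}
    (hm : ∀ x, mtx x = none → mtx' x = none) (h : pvZ mtx N M p) : pvZ mtx' N M p := by
  induction h with
  | base => exact pvZ.base
  | step q p _ hn hi he ih => exact pvZ.step q p ih hn hi (hm _ he)

def pvMatchA (mtx : (Int × Int) → Option Char) (order : String) (p : Int × Int) : Prop :=
  ∃ ch, mtx p = some ch ∧ (order == String.ofList [ch]) = true

/- ---------- characterization of A's BFS ---------- -/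

def pvBfsInv (mtx : (Int × Int) → Option Char) (order : String) (N M : Int)
    (q vis coll : List (Int × Int)) : Prop :=
  (0, 0) ∈ vis ∧ q.Nodup ∧ vis.Nodup ∧ coll.Nodup ∧
  (∀ x ∈ q, x ∈ vis) ∧ (∀ x ∈ q, mtx x = none) ∧
  (∀ x ∈ vis, pvInb N M x) ∧
  (∀ x ∈ vis, x = (0, 0) ∨ ∃ r, pvZ mtx N M r ∧ x ∈ pvNbrs r) ∧
  (∀ x ∈ vis, x ∉ q → mtx x = none → ∀ np ∈ pvNbrs x, pvInb N M np → np ∈ vis) ∧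
  (∀ x, x ∈ coll ↔ x ∈ vis ∧ pvMatchA mtx order x)

set_option maxHeartbeats 2000000 in
theorem pvBfsA_fold (mtx : (Int × Int) → Option Char) (order : String) (N M : Int)
    (ns : List (Int × Int)) :
    ∀ (q vis coll : List (Int × Int)), q.Nodup → vis.Nodup → coll.Nodup →
    (∀ x ∈ q, x ∈ vis) → (∀ x ∈ coll, x ∈ vis) →
    (∀ x, x ∈ (ns.foldl (pvBfsStep mtx order N M) (q, vis, coll)).2.1 ↔
        x ∈ vis ∨ (x ∈ ns ∧ pvInb N M x)) ∧
    (∀ x, x ∈ (ns.foldl (pvBfsStep mtx order N M) (q, vis, coll)).1 ↔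
        x ∈ q ∨ (x ∈ ns ∧ pvInb N M x ∧ mtx x = none ∧ x ∉ vis)) ∧
    (∀ x, x ∈ (ns.foldl (pvBfsStep mtx order N M) (q, vis, coll)).2.2 ↔
        x ∈ coll ∨ (x ∈ ns ∧ pvInb N M x ∧ pvMatchA mtx order x ∧ x ∉ vis)) ∧
    (ns.foldl (pvBfsStep mtx order N M) (q, vis, coll)).1.Nodup ∧
    (ns.foldl (pvBfsStep mtx order N M) (q, vis, coll)).2.1.Nodup ∧
    (ns.foldl (pvBfsStep mtx order N M) (q, vis, coll)).2.2.Nodup ∧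
    (∀ x ∈ (ns.foldl (pvBfsStep mtx order N M) (q, vis, coll)).1,
        x ∈ (ns.foldl (pvBfsStep mtx order N M) (q, vis, coll)).2.1) ∧
    (∀ x ∈ (ns.foldl (pvBfsStep mtx order N M) (q, vis, coll)).2.2,
        x ∈ (ns.foldl (pvBfsStep mtx order N M) (q, vis, coll)).2.1) ∧
    (ns.foldl (pvBfsStep mtx order N M) (q, vis, coll)).1.length + vis.length ≤
      q.length + (ns.foldl (pvBfsStep mtx order N M) (q, vis, coll)).2.1.length := by
  induction ns with
  | nil =>
    intro q vis coll hq hvis hcoll hqv hcv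
    simp only [List.foldl_nil]
    exact ⟨fun x => by simp, fun x => by simp, fun x => by simp, hq, hvis, hcoll, hqv, hcv,
      by omega⟩
  | cons n ns ih =>
    intro q vis coll hq hvis hcoll hqv hcv
    simp only [List.foldl_cons]
    by_cases hc : (0 ≤ n.1 ∧ n.1 < N + 2 ∧ 0 ≤ n.2 ∧ n.2 < M + 2) ∧ n ∉ vis
    case neg =>
      have hstep : pvBfsStep mtx order N M (q, vis, coll) n = (q, vis, coll) := by
        simp only [pvBfsStep]
        rw [if_neg hc]
      rw [hstep]
      obtain ⟨I1, I2, I3, I4, I5, I6, I7, I8, I9⟩ := ih q vis coll hq hvis hcoll hqv hcv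
      have hc' : ¬ (0 ≤ n.1 ∧ n.1 < N + 2 ∧ 0 ≤ n.2 ∧ n.2 < M + 2) ∨ n ∈ vis := by tauto
      refine ⟨fun x => ?_, fun x => ?_, fun x => ?_, I4, I5, I6, I7, I8, I9⟩
      · rw [I1 x]
        by_cases hx : x = n
        · subst hx; simp only [List.mem_cons, true_or, pvInb]; tauto
        · simp only [List.mem_cons, hx, false_or]
      · rw [I2 x]
        by_cases hx : x = n
        · subst hx; simp only [List.mem_cons, true_or, pvInb]; tauto
        · simp only [List.mem_cons, hx, false_or]
      · rw [I3 x]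
        by_cases hx : x = n
        · subst hx
          simp only [List.mem_cons, true_or, pvInb]
          constructor
          · rintro (h | h)
            · exact Or.inl h
            · exact Or.inr ⟨trivial, h.2⟩
          · rintro (h | ⟨-, h2, h3, h4⟩)
            · exact Or.inl h
            · rcases hc' with h | h
              · exact absurd h2 h
              · exact absurd h h4
        · simp only [List.mem_cons, hx, false_or]
    case pos =>
      have hninb : pvInb N M n := hc.1
      have hnvis : n ∉ vis := hc.2
      have hnq : n ∉ q := fun h => hnvis (hqv n h)
      have hnc : n ∉ coll := fun h => hnvis (hcv n h)
      have hmtx : mtx n = none ∨ ∃ ch, mtx n = some ch := by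
        cases h : mtx n
        · exact Or.inl rfl
        · exact Or.inr ⟨_, rfl⟩
      rcases hmtx with hm | ⟨ch, hm⟩
      · -- empty cell: mark and enqueue
        have hnmA : ¬ pvMatchA mtx order n := by
          rintro ⟨ch', hch', -⟩
          rw [hm] at hch'
          cases hch'
        have hstep : pvBfsStep mtx order N M (q, vis, coll) n = (q ++ [n], n :: vis, coll) := by
          simp only [pvBfsStep]
          rw [if_pos hc, hm]
        rw [hstep]
        obtain ⟨I1, I2, I3, I4, I5, I6, I7, I8, I9⟩ := ih (q ++ [n]) (n :: vis) coll
          (((List.perm_append_singleton n q).nodup_iff).2 (List.nodup_cons.2 ⟨hnq, hq⟩))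
          (List.nodup_cons.2 ⟨hnvis, hvis⟩) hcoll
          (fun x hx => by
            rcases List.mem_append.1 hx with h | h
            · exact List.mem_cons_of_mem _ (hqv x h)
            · simp at h
              simp [h])
          (fun x hx => List.mem_cons_of_mem _ (hcv x hx))
        refine ⟨fun x => ?_, fun x => ?_, fun x => ?_, I4, I5, I6, I7, I8, by simp at I9; omega⟩
        · rw [I1 x]
          by_cases hx : x = n
          · subst hx
            exact iff_of_true (Or.inl (by simp)) (Or.inr ⟨by simp, hninb⟩)
          · simp only [List.mem_cons, hx, false_or]
        · rw [I2 x]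
          by_cases hx : x = n
          · subst hx
            exact iff_of_true (Or.inl (by simp)) (Or.inr ⟨by simp, hninb, hm, hnvis⟩)
          · simp only [List.mem_append, List.mem_cons, List.mem_singleton, hx, or_false,
              false_or]
            try tauto
        · rw [I3 x]
          by_cases hx : x = n
          · subst hx
            constructor
            · rintro (h | ⟨-, -, hmA, -⟩)
              · exact Or.inl h
              · exact absurd hmA hnmA
            · rintro (h | ⟨-, -, hmA, -⟩)
              · exact Or.inl h
              · exact absurd hmA hnmA
          · simp only [List.mem_cons, hx, false_or]
            try tauto
      · -- occupied cell: mark, maybe collect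
        have hne : mtx n ≠ none := by
          rw [hm]
          simp
        by_cases hmatch : (order == String.ofList [ch]) = true
        case pos =>
          have hmA : pvMatchA mtx order n := ⟨ch, hm, hmatch⟩
          have hstep : pvBfsStep mtx order N M (q, vis, coll) n =
              (q, n :: vis, coll ++ [n]) := by
            simp only [pvBfsStep]
            rw [if_pos hc, hm]
            exact if_pos hmatch
          rw [hstep]
          obtain ⟨I1, I2, I3, I4, I5, I6, I7, I8, I9⟩ := ih q (n :: vis) (coll ++ [n])
            hq (List.nodup_cons.2 ⟨hnvis, hvis⟩)
            (((List.perm_append_singleton n coll).nodup_iff).2 (List.nodup_cons.2 ⟨hnc, hcoll⟩))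
            (fun x hx => List.mem_cons_of_mem _ (hqv x hx))
            (fun x hx => by
              rcases List.mem_append.1 hx with h | h
              · exact List.mem_cons_of_mem _ (hcv x h)
              · simp at h
                simp [h])
          refine ⟨fun x => ?_, fun x => ?_, fun x => ?_, I4, I5, I6, I7, I8,
            by simp at I9; omega⟩
          · rw [I1 x]
            by_cases hx : x = n
            · subst hx
              exact iff_of_true (Or.inl (by simp)) (Or.inr ⟨by simp, hninb⟩)
            · simp only [List.mem_cons, hx, false_or]
          · rw [I2 x]
            by_cases hx : x = n
            · subst hx
              constructor
              · rintro (h | ⟨-, -, hnone, -⟩)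
                · exact Or.inl h
                · exact absurd hnone hne
              · rintro (h | ⟨-, -, hnone, -⟩)
                · exact Or.inl h
                · exact absurd hnone hne
            · simp only [List.mem_cons, hx, false_or]
              try tauto
          · rw [I3 x]
            by_cases hx : x = n
            · subst hx
              exact iff_of_true (Or.inl (by simp)) (Or.inr ⟨by simp, hninb, hmA, hnvis⟩)
            · simp only [List.mem_append, List.mem_cons, List.mem_singleton, hx, or_false,
                false_or]
              try tauto
        case neg =>
          have hnm : ¬ pvMatchA mtx order n := by
            rintro ⟨ch', hch', hm'⟩
            rw [hm] at hch'
            cases hch'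
            exact hmatch hm'
          have hstep : pvBfsStep mtx order N M (q, vis, coll) n = (q, n :: vis, coll) := by
            simp only [pvBfsStep]
            rw [if_pos hc, hm]
            exact if_neg hmatch
          rw [hstep]
          obtain ⟨I1, I2, I3, I4, I5, I6, I7, I8, I9⟩ := ih q (n :: vis) coll
            hq (List.nodup_cons.2 ⟨hnvis, hvis⟩) hcoll
            (fun x hx => List.mem_cons_of_mem _ (hqv x hx))
            (fun x hx => List.mem_cons_of_mem _ (hcv x hx))
          refine ⟨fun x => ?_, fun x => ?_, fun x => ?_, I4, I5, I6, I7, I8,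
            by simp at I9; omega⟩
          · rw [I1 x]
            by_cases hx : x = n
            · subst hx
              exact iff_of_true (Or.inl (by simp)) (Or.inr ⟨by simp, hninb⟩)
            · simp only [List.mem_cons, hx, false_or]
          · rw [I2 x]
            by_cases hx : x = n
            · subst hx
              constructor
              · rintro (h | ⟨-, -, hnone, -⟩)
                · exact Or.inl h
                · exact absurd hnone hne
              · rintro (h | ⟨-, -, hnone, -⟩)
                · exact Or.inl h
                · exact absurd hnone hne
            · simp only [List.mem_cons, hx, false_or]
              try tauto
          · rw [I3 x]
            by_cases hx : x = n
            · subst hx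
              constructor
              · rintro (h | ⟨-, -, -, habs⟩)
                · exact Or.inl h
                · exact absurd (by simp) habs
              · rintro (h | ⟨-, -, hmA, -⟩)
                · exact Or.inl h
                · exact absurd hmA hnm
            · simp only [List.mem_cons, hx, false_or]
              try tauto


theorem pvBfs_final (mtx : (Int × Int) → Option Char) (order : String) (N M : Int)
    (h00 : mtx (0, 0) = none) (vis coll : List (Int × Int))
    (hinv : pvBfsInv mtx order N M [] vis coll) :
    coll.Nodup ∧
    (∀ x, x ∈ coll ↔
        pvInb N M x ∧ pvMatchA mtx order x ∧ ∃ r, pvZ mtx N M r ∧ x ∈ pvNbrs r) := by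
  obtain ⟨h0, hqnd, hvnd, hcnd, hqv, hqe, hvin, hvz, hcl, hciff⟩ := hinv
  have hZvis : ∀ r, pvZ mtx N M r → r ∈ vis := by
    intro r hr
    induction hr with
    | base => exact h0
    | step r' p hZ hnb hinb hnone ihz =>
      exact hcl r' ihz (by simp) (pvZ_none h00 hZ) p hnb hinb
  refine ⟨hcnd, fun x => ?_⟩
  rw [hciff x]
  constructor
  · rintro ⟨hxv, hmA⟩
    refine ⟨hvin x hxv, hmA, ?_⟩
    rcases hvz x hxv with rfl | ⟨r, hr, hnb⟩
    · obtain ⟨ch, hch, -⟩ := hmA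
      rw [h00] at hch
      cases hch
    · exact ⟨r, hr, hnb⟩
  · rintro ⟨hinb, hmA, r, hr, hnb⟩
    exact ⟨hcl r (hZvis r hr) (by simp) (pvZ_none h00 hr) x hnb hinb, hmA⟩

set_option maxHeartbeats 2000000 in
theorem pvBfsA_run (mtx : (Int × Int) → Option Char) (order : String) (N M : Int)
    (hN : 0 ≤ N) (hM : 0 ≤ M) (h00 : mtx (0, 0) = none) :
    ∀ (fuel : Nat) (q vis coll : List (Int × Int)),
    pvBfsInv mtx order N M q vis coll →
    q.length + (((N + 2) * (M + 2)).toNat - vis.length) ≤ fuel →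
    (pvBfsA mtx order N M fuel q vis coll).Nodup ∧
    (∀ x, x ∈ pvBfsA mtx order N M fuel q vis coll ↔
        pvInb N M x ∧ pvMatchA mtx order x ∧ ∃ r, pvZ mtx N M r ∧ x ∈ pvNbrs r) := by
  intro fuel
  induction fuel with
  | zero =>
    intro q vis coll hinv hbound
    have hq : q = [] := by
      cases q with
      | nil => rfl
      | cons a t => simp at hbound
    subst hq
    simpa [pvBfsA] using pvBfs_final mtx order N M h00 vis coll hinv
  | succ k ih =>
    intro q vis coll hinv hbound
    cases q with
    | nil => simpa [pvBfsA] using pvBfs_final mtx order N M h00 vis coll hinv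
    | cons p rest =>
      obtain ⟨h0, hqnd, hvnd, hcnd, hqv, hqe, hvin, hvz, hcl, hciff⟩ := hinv
      have hrestnd : rest.Nodup := (List.nodup_cons.1 hqnd).2
      have hpnotrest : p ∉ rest := (List.nodup_cons.1 hqnd).1
      have hpvis : p ∈ vis := hqv p (by simp)
      have hpnone : mtx p = none := hqe p (by simp)
      have hpZ : pvZ mtx N M p := by
        rcases hvz p hpvis with rfl | ⟨r, hr, hnb⟩
        · exact pvZ.base
        · exact pvZ.step r p hr hnb (hvin p hpvis) hpnone
      obtain ⟨I1, I2, I3, I4, I5, I6, I7, I8, I9⟩ :=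
        pvBfsA_fold mtx order N M (pvNbrs p) rest vis coll hrestnd hvnd hcnd
          (fun x hx => hqv x (by simp [hx])) (fun x hx => ((hciff x).1 hx).1)
      have hunf : pvBfsA mtx order N M (k + 1) (p :: rest) vis coll =
          pvBfsA mtx order N M k
            ((pvNbrs p).foldl (pvBfsStep mtx order N M) (rest, vis, coll)).1
            ((pvNbrs p).foldl (pvBfsStep mtx order N M) (rest, vis, coll)).2.1
            ((pvNbrs p).foldl (pvBfsStep mtx order N M) (rest, vis, coll)).2.2 := rfl
      rw [hunf]
      have hFinb : ∀ x ∈ ((pvNbrs p).foldl (pvBfsStep mtx order N M) (rest, vis, coll)).2.1,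
          pvInb N M x := by
        intro x hx
        rcases (I1 x).1 hx with h | h
        · exact hvin x h
        · exact h.2
      apply ih
      · refine ⟨(I1 (0, 0)).2 (Or.inl h0), I4, I5, I6, I7, ?_, hFinb, ?_, ?_, ?_⟩
        · -- queue elements are empty cells
          intro x hx
          rcases (I2 x).1 hx with h | h
          · exact hqe x (by simp [h])
          · exact h.2.2.1
        · -- vis cells are start or neighbours of Z
          intro x hx
          rcases (I1 x).1 hx with h | h
          · exact hvz x h
          · exact Or.inr ⟨p, hpZ, h.1⟩
        · -- closedness for processed cells
          intro x hx hxq hxnone np hnp hnpinb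
          rcases (I1 x).1 hx with hxv | hxnew
          · by_cases hxp : x = p
            · subst hxp
              exact (I1 np).2 (Or.inr ⟨hnp, hnpinb⟩)
            · have hxrest : x ∉ rest := fun h => hxq ((I2 x).2 (Or.inl h))
              have hxqold : x ∉ p :: rest := by simp [hxp, hxrest]
              exact (I1 np).2 (Or.inl (hcl x hxv hxqold hxnone np hnp hnpinb))
          · by_cases hxv : x ∈ vis
            · by_cases hxp : x = p
              · subst hxp
                exact (I1 np).2 (Or.inr ⟨hnp, hnpinb⟩)
              · have hxrest : x ∉ rest := fun h => hxq ((I2 x).2 (Or.inl h))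
                have hxqold : x ∉ p :: rest := by simp [hxp, hxrest]
                exact (I1 np).2 (Or.inl (hcl x hxv hxqold hxnone np hnp hnpinb))
            · exact absurd ((I2 x).2 (Or.inr ⟨hxnew.1, hxnew.2, hxnone, hxv⟩)) hxq
        · -- the collected list is exactly the matching visited cells
          intro x
          rw [I3 x]
          constructor
          · rintro (h | h)
            · obtain ⟨hxv, hm⟩ := (hciff x).1 h
              exact ⟨(I1 x).2 (Or.inl hxv), hm⟩
            · exact ⟨(I1 x).2 (Or.inr ⟨h.1, h.2.1⟩), h.2.2.1⟩
          · rintro ⟨hxF, hm⟩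
            rcases (I1 x).1 hxF with hxv | hxnew
            · exact Or.inl ((hciff x).2 ⟨hxv, hm⟩)
            · by_cases hxv : x ∈ vis
              · exact Or.inl ((hciff x).2 ⟨hxv, hm⟩)
              · exact Or.inr ⟨hxnew.1, hxnew.2, hm, hxv⟩
      · -- fuel accounting
        have hFbd := pvNodup_le_box hN hM I5 hFinb
        have hvisle : vis.length ≤
            ((pvNbrs p).foldl (pvBfsStep mtx order N M) (rest, vis, coll)).2.1.length :=
          ((hvnd.subperm (fun x hx => (I1 x).2 (Or.inl hx)))).length_le
        simp only [List.length_cons] at hbound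
        omega

set_option maxHeartbeats 2000000 in
theorem pvBfsA_char (mtx : (Int × Int) → Option Char) (order : String) (N M : Int)
    (hN : 0 ≤ N) (hM : 0 ≤ M) (h00 : mtx (0, 0) = none) :
    (pvBfsA mtx order N M (((N + 2) * (M + 2)).toNat + 1) [(0, 0)] [(0, 0)] []).Nodup ∧
    (∀ x, x ∈ pvBfsA mtx order N M (((N + 2) * (M + 2)).toNat + 1) [(0, 0)] [(0, 0)] [] ↔
        pvInb N M x ∧ pvMatchA mtx order x ∧ ∃ r, pvZ mtx N M r ∧ x ∈ pvNbrs r) := by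
  apply pvBfsA_run mtx order N M hN hM h00
  · refine ⟨by simp, by simp, by simp, by simp, by simp, ?_, ?_, ?_, ?_, ?_⟩
    · intro x hx; simp at hx; subst hx; exact h00
    · intro x hx; simp at hx; subst hx; exact ⟨le_refl _, by omega, le_refl _, by omega⟩
    · intro x hx; simp at hx; subst hx; exact Or.inl rfl
    · intro x hx hxq; simp at hx; simp [hx] at hxq
    · intro x
      simp only [List.mem_nil_iff, false_iff]
      rintro ⟨hxv, ch, hch, -⟩
      simp at hxv
      subst hxv
      rw [h00] at hch
      cases hch
  · simp only [List.length_cons, List.length_nil]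
    omega

/- ---------- characterization of B's grow loop ---------- -/

def pvGrowInv (grid : PySem.Dict (Int × Int) Char) (mtx : (Int × Int) → Option Char)
    (N M : Int) (stack : List (Int × Int)) (out : PySem.Set (Int × Int)) : Prop :=
  ((-1, -1) : Int × Int) ∈ out ∧ stack.Nodup ∧ (out : List (Int × Int)).Nodup ∧
  (∀ x ∈ stack, x ∈ out) ∧
  (∀ x ∈ out, grid.contains x = false) ∧
  (∀ x ∈ out, pvZ mtx N M (pvSh x)) ∧
  (∀ x ∈ out, x ∉ stack → ∀ nq ∈ pvNbrs x, pvInbB N M nq → grid.contains nq = false →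
      nq ∈ out)

theorem pvSet_contains_false {s : PySem.Set (Int × Int)} {x : Int × Int} :
    (PySem.Set.contains s x = false) ↔ x ∉ s := by
  rw [← PySem.Set.contains_iff]
  cases h : PySem.Set.contains s x <;> simp

theorem pvDict_contains_false_iff (grid : PySem.Dict (Int × Int) Char) (y : Int × Int) :
    grid.contains y = false ↔ grid.get? y = none := by
  rw [PySem.Dict.contains_eq_isSome_get?]
  cases grid.get? y <;> simp

theorem pvNbrs_unsh {p r : Int × Int} (h : p ∈ pvNbrs r) :
    pvUnsh p ∈ pvNbrs (pvUnsh r) := by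
  have h2 : pvNbrs r = (pvNbrs (pvUnsh r)).map pvSh := by rw [← pvNbrs_sh, pvSh_unsh]
  rw [h2] at h
  obtain ⟨y, hy, hyp⟩ := List.mem_map.1 h
  rw [← hyp, pvUnsh_sh]
  exact hy

theorem pvFuelArith {bound a b o r s k : ℕ} (hI : a + o ≤ r + b) (hbd : b ≤ bound)
    (hole : o ≤ b) (hlen : r + 1 = s) (hbound : s + (bound - o) ≤ k + 1) :
    a + (bound - b) ≤ k := by omega

set_option maxHeartbeats 2000000 in
theorem pvGrow_fold (grid : PySem.Dict (Int × Int) Char) (N M : Int)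
    (ns : List (Int × Int)) :
    ∀ (stack : List (Int × Int)) (out : PySem.Set (Int × Int)),
    stack.Nodup → (out : List (Int × Int)).Nodup → (∀ x ∈ stack, x ∈ out) →
    (∀ x, x ∈ (ns.foldl (pvGrowStep grid N M) (stack, out)).2 ↔
        x ∈ out ∨ (x ∈ ns ∧ pvInbB N M x ∧ grid.contains x = false)) ∧
    (∀ x, x ∈ (ns.foldl (pvGrowStep grid N M) (stack, out)).1 ↔
        x ∈ stack ∨ (x ∈ ns ∧ pvInbB N M x ∧ grid.contains x = false ∧ x ∉ out)) ∧
    (ns.foldl (pvGrowStep grid N M) (stack, out)).1.Nodup ∧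
    ((ns.foldl (pvGrowStep grid N M) (stack, out)).2 : List (Int × Int)).Nodup ∧
    (∀ x ∈ (ns.foldl (pvGrowStep grid N M) (stack, out)).1,
        x ∈ (ns.foldl (pvGrowStep grid N M) (stack, out)).2) ∧
    (ns.foldl (pvGrowStep grid N M) (stack, out)).1.length + (out : List (Int × Int)).length ≤
      stack.length + ((ns.foldl (pvGrowStep grid N M) (stack, out)).2 : List (Int × Int)).length := by
  induction ns with
  | nil =>
    intro stack out hst hout hso
    simp only [List.foldl_nil]
    exact ⟨fun x => by simp, fun x => by simp, hst, hout, hso, by omega⟩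
  | cons n ns ih =>
    intro stack out hst hout hso
    simp only [List.foldl_cons]
    by_cases hc : (-1 ≤ n.1 ∧ n.1 ≤ N ∧ -1 ≤ n.2 ∧ n.2 ≤ M) ∧
        PySem.Set.contains out n = false ∧ grid.contains n = false
    case neg =>
      have hstep : pvGrowStep grid N M (stack, out) n = (stack, out) := by
        simp only [pvGrowStep]
        rw [if_neg hc]
      rw [hstep]
      obtain ⟨I1, I2, I3, I4, I5, I6⟩ := ih stack out hst hout hso
      have hc' : ¬ pvInbB N M n ∨ n ∈ out ∨ ¬ grid.contains n = false := by
        by_cases h1 : pvInbB N M n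
        · by_cases h2 : n ∈ out
          · exact Or.inr (Or.inl h2)
          · refine Or.inr (Or.inr fun h3 => hc ⟨h1, pvSet_contains_false.2 h2, h3⟩)
        · exact Or.inl h1
      refine ⟨fun x => ?_, fun x => ?_, I3, I4, I5, I6⟩
      · rw [I1 x]
        by_cases hx : x = n
        · subst hx
          constructor
          · rintro (h | h)
            · exact Or.inl h
            · exact Or.inr ⟨by simp, h.2⟩
          · rintro (h | ⟨-, hinb, hfree⟩)
            · exact Or.inl h
            · rcases hc' with h' | h' | h'
              · exact absurd hinb h'
              · exact Or.inl h'
              · exact absurd hfree h'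
        · simp only [List.mem_cons, hx, false_or]
      · rw [I2 x]
        by_cases hx : x = n
        · subst hx
          constructor
          · rintro (h | h)
            · exact Or.inl h
            · exact Or.inr ⟨by simp, h.2⟩
          · rintro (h | ⟨-, hinb, hfree, hnout⟩)
            · exact Or.inl h
            · rcases hc' with h' | h' | h'
              · exact absurd hinb h'
              · exact absurd h' hnout
              · exact absurd hfree h'
        · simp only [List.mem_cons, hx, false_or]
    case pos =>
      have hninb : pvInbB N M n := hc.1
      have hnout : n ∉ out := pvSet_contains_false.1 hc.2.1
      have hnfree : grid.contains n = false := hc.2.2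
      have hnstack : n ∉ stack := fun h => hnout (hso n h)
      have hstep : pvGrowStep grid N M (stack, out) n =
          (stack ++ [n], PySem.Set.add out n) := by
        simp only [pvGrowStep]
        rw [if_pos hc]
      rw [hstep]
      obtain ⟨I1, I2, I3, I4, I5, I6⟩ := ih (stack ++ [n]) (PySem.Set.add out n)
        (((List.perm_append_singleton n stack).nodup_iff).2 (List.nodup_cons.2 ⟨hnstack, hst⟩))
        (PySem.Set.nodup_add out n hout)
        (fun x hx => by
          rcases List.mem_append.1 hx with h | h
          · exact (PySem.Set.mem_add out n x).2 (Or.inl (hso x h))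
          · simp at h
            exact (PySem.Set.mem_add out n x).2 (Or.inr h))
      refine ⟨fun x => ?_, fun x => ?_, I3, I4, I5, ?_⟩
      · rw [I1 x]
        by_cases hx : x = n
        · subst hx
          exact iff_of_true (Or.inl ((PySem.Set.mem_add out x x).2 (Or.inr rfl)))
            (Or.inr ⟨by simp, hninb, hnfree⟩)
        · have hmem : x ∈ PySem.Set.add out n ↔ x ∈ out := by
            rw [PySem.Set.mem_add]
            simp [hx]
          rw [hmem]
          simp only [List.mem_cons, hx, false_or]
      · rw [I2 x]
        by_cases hx : x = n
        · subst hx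
          constructor
          · intro _
            exact Or.inr ⟨by simp, hninb, hnfree, hnout⟩
          · intro _
            exact Or.inl (List.mem_append.2 (Or.inr (by simp)))
        · constructor
          · rintro (h | ⟨hns, hinb, hfree, hnout'⟩)
            · rcases List.mem_append.1 h with h' | h'
              · exact Or.inl h'
              · simp at h'
                exact absurd h' hx
            · exact Or.inr ⟨by simp [hns], hinb, hfree,
                fun hmem => hnout' ((PySem.Set.mem_add out n x).2 (Or.inl hmem))⟩
          · rintro (h | ⟨hns, hinb, hfree, hnout'⟩)
            · exact Or.inl (List.mem_append.2 (Or.inl h))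
            · have hns' : x ∈ ns := by
                rcases List.mem_cons.1 hns with h' | h'
                · exact absurd h' hx
                · exact h'
              refine Or.inr ⟨hns', hinb, hfree, fun hmem => ?_⟩
              rcases (PySem.Set.mem_add out n x).1 hmem with h' | h'
              · exact hnout' h'
              · exact hx h'
      · have h1 : (PySem.Set.add out n : List (Int × Int)).length =
            (out : List (Int × Int)).length + 1 := by
          rw [PySem.Set.add_of_not_mem hnout]
          simp
        have h2 : (stack ++ [n]).length = stack.length + 1 := by simp
        omega

theorem pvGrow_run (grid : PySem.Dict (Int × Int) Char) (mtx : (Int × Int) → Option Char)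
    (N M : Int) (hN : 0 ≤ N) (hM : 0 ≤ M)
    (hrel : ∀ x : Int × Int, mtx (pvSh x) = grid.get? x)
    (hout : ∀ p : Int × Int, ¬ pvInb N M p → mtx p = none) :
    ∀ (fuel : Nat) (stack : List (Int × Int)) (out : PySem.Set (Int × Int)),
    pvGrowInv grid mtx N M stack out →
    stack.length + (((N + 2) * (M + 2)).toNat - (out : List (Int × Int)).length) ≤ fuel →
    ((pvGrow grid N M fuel stack out : List (Int × Int)).Nodup ∧
     (∀ x, x ∈ pvGrow grid N M fuel stack out ↔ pvZ mtx N M (pvSh x))) := by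
  have hget : ∀ y, grid.contains y = false ↔ mtx (pvSh y) = none := by
    intro y
    rw [pvDict_contains_false_iff, hrel y]
  have hfinal : ∀ (out : PySem.Set (Int × Int)), pvGrowInv grid mtx N M [] out →
      ((out : List (Int × Int)).Nodup ∧ (∀ x, x ∈ out ↔ pvZ mtx N M (pvSh x))) := by
    intro out hinv
    obtain ⟨hcorner, hstnd, houtnd, hso, hfree, hZm, hcl⟩ := hinv
    have key : ∀ p, pvZ mtx N M p → pvUnsh p ∈ out := by
      intro p hp
      induction hp with
      | base => simpa [pvUnsh] using hcorner
      | step r p hr hnb hinb hnone ihr =>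
        refine hcl (pvUnsh r) ihr (by simp) (pvUnsh p) (pvNbrs_unsh hnb) ?_ ?_
        · rw [pvInbB_iff, pvSh_unsh]
          exact hinb
        · rw [hget, pvSh_unsh]
          exact hnone
    refine ⟨houtnd, fun x => ⟨hZm x, fun hx => ?_⟩⟩
    have := key (pvSh x) hx
    rwa [pvUnsh_sh] at this
  intro fuel
  induction fuel with
  | zero =>
    intro stack out hinv hbound
    have hst : stack = [] := by
      cases stack with
      | nil => rfl
      | cons a t => simp at hbound
    subst hst
    simpa [pvGrow] using hfinal out hinv
  | succ k ih =>
    intro stack out hinv hbound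
    cases stack with
    | nil => simpa [pvGrow] using hfinal out hinv
    | cons x0 xs =>
      obtain ⟨hcorner, hstnd, houtnd, hso, hfree, hZm, hcl⟩ := hinv
      have hne : (x0 :: xs) ≠ [] := by simp
      have heq : (x0 :: xs).dropLast ++ [(x0 :: xs).getLast hne] = x0 :: xs :=
        List.dropLast_append_getLast hne
      have hrestnd : (x0 :: xs).dropLast.Nodup :=
        hstnd.sublist (List.dropLast_sublist _)
      have hpL : (x0 :: xs).getLast hne ∈ (x0 :: xs) := List.getLast_mem hne
      have hpout : (x0 :: xs).getLast hne ∈ out := hso _ hpL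
      have hpnrest : (x0 :: xs).getLast hne ∉ (x0 :: xs).dropLast := by
        intro hmem
        have hnd2 : ((x0 :: xs).dropLast ++ [(x0 :: xs).getLast hne]).Nodup := by
          rw [heq]
          exact hstnd
        have hnd3 := ((List.perm_append_singleton ((x0 :: xs).getLast hne)
          (x0 :: xs).dropLast).nodup_iff).1 hnd2
        exact (List.nodup_cons.1 hnd3).1 hmem
      have hpZ : pvZ mtx N M (pvSh ((x0 :: xs).getLast hne)) := hZm _ hpout
      obtain ⟨I1, I2, I3, I4, I5, I6⟩ :=
        pvGrow_fold grid N M (pvNbrs ((x0 :: xs).getLast hne)) (x0 :: xs).dropLast out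
          hrestnd houtnd (fun y hy => hso y (List.dropLast_subset _ hy))
      have hunf : pvGrow grid N M (k + 1) (x0 :: xs) out =
          pvGrow grid N M k
            ((pvNbrs ((x0 :: xs).getLast hne)).foldl (pvGrowStep grid N M)
              ((x0 :: xs).dropLast, out)).1
            ((pvNbrs ((x0 :: xs).getLast hne)).foldl (pvGrowStep grid N M)
              ((x0 :: xs).dropLast, out)).2 := rfl
      rw [hunf]
      have hFinb : ∀ y ∈ ((pvNbrs ((x0 :: xs).getLast hne)).foldl (pvGrowStep grid N M)
          ((x0 :: xs).dropLast, out)).2, pvInbB N M y := by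
        intro y hy
        rcases (I1 y).1 hy with h | h
        · rw [pvInbB_iff]
          exact pvZ_inb hN hM (hZm y h)
        · exact h.2.1
      apply ih
      · refine ⟨(I1 (-1, -1)).2 (Or.inl hcorner), I3, I4, I5, ?_, ?_, ?_⟩
        · -- all cells of the new outside are empty
          intro y hy
          rcases (I1 y).1 hy with h | h
          · exact hfree y h
          · exact h.2.2
        · -- all cells of the new outside are outside-reachable
          intro y hy
          rcases (I1 y).1 hy with h | h
          · exact hZm y h
          · refine pvZ.step (pvSh ((x0 :: xs).getLast hne)) (pvSh y) hpZ ?_ ?_ ?_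
            · rw [pvNbrs_sh]
              exact List.mem_map_of_mem h.1
            · rw [← pvInbB_iff]
              exact h.2.1
            · rw [← hget]
              exact h.2.2
        · -- closedness of processed cells
          intro y hy hynstack nq hnq hnqinb hnqfree
          rcases (I1 y).1 hy with hyout | hynew
          · by_cases hyp : y = (x0 :: xs).getLast hne
            · subst hyp
              exact (I1 nq).2 (Or.inr ⟨hnq, hnqinb, hnqfree⟩)
            · have hyrest : y ∉ (x0 :: xs).dropLast := fun h =>
                hynstack ((I2 y).2 (Or.inl h))
              have hyold : y ∉ (x0 :: xs) := by
                rw [← heq]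
                intro hmem
                rcases List.mem_append.1 hmem with h | h
                · exact hyrest h
                · simp at h
                  exact hyp h
              exact (I1 nq).2 (Or.inl (hcl y hyout hyold nq hnq hnqinb hnqfree))
          · by_cases hyout : y ∈ out
            · by_cases hyp : y = (x0 :: xs).getLast hne
              · subst hyp
                exact (I1 nq).2 (Or.inr ⟨hnq, hnqinb, hnqfree⟩)
              · have hyrest : y ∉ (x0 :: xs).dropLast := fun h =>
                  hynstack ((I2 y).2 (Or.inl h))
                have hyold : y ∉ (x0 :: xs) := by
                  rw [← heq]
                  intro hmem
                  rcases List.mem_append.1 hmem with h | h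
                  · exact hyrest h
                  · simp at h
                    exact hyp h
                exact (I1 nq).2 (Or.inl (hcl y hyout hyold nq hnq hnqinb hnqfree))
            · exact absurd ((I2 y).2 (Or.inr ⟨hynew.1, hynew.2.1, hynew.2.2, hyout⟩)) hynstack
      · -- fuel accounting
        have hmapnd : (((pvNbrs ((x0 :: xs).getLast hne)).foldl (pvGrowStep grid N M)
            ((x0 :: xs).dropLast, out)).2.map pvSh).Nodup :=
          I4.map (fun a b h => pvSh_inj h)
        have hmapin : ∀ z ∈ (((pvNbrs ((x0 :: xs).getLast hne)).foldl (pvGrowStep grid N M)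
            ((x0 :: xs).dropLast, out)).2.map pvSh), pvInb N M z := by
          intro z hz
          obtain ⟨y, hy, rfl⟩ := List.mem_map.1 hz
          rw [← pvInbB_iff]
          exact hFinb y hy
        have hbd := pvNodup_le_box hN hM hmapnd hmapin
        rw [List.length_map] at hbd
        have houtle : (out : List (Int × Int)).length ≤
            (((pvNbrs ((x0 :: xs).getLast hne)).foldl (pvGrowStep grid N M)
              ((x0 :: xs).dropLast, out)).2 : List (Int × Int)).length :=
          (houtnd.subperm (fun y hy => (I1 y).2 (Or.inl hy))).length_le
        have hlen : ((x0 :: xs).dropLast).length + 1 = (x0 :: xs).length := by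
          conv_rhs => rw [← heq]
          simp
        exact pvFuelArith I6 hbd houtle hlen hbound

/- ---------- characterization of A's full-matrix sweep (multi-char request) ---------- -/

def pvProdInner (N M : Int) : List (Int × Int) :=
  (PySem.List.pyRange 1 (N + 1)).flatMap (fun r =>
    (PySem.List.pyRange 1 (M + 1)).map (fun c => (r, c)))

theorem mem_pvProdInner {N M : Int} {x : Int × Int} :
    x ∈ pvProdInner N M ↔ pvInnerA N M x := by
  simp only [pvProdInner, List.mem_flatMap, List.mem_map, PySem.List.mem_pyRange_one, pvInnerA]
  constructor
  · rintro ⟨r, hr, c, hc, rfl⟩; exact ⟨hr.1, by omega, hc.1, by omega⟩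
  · rintro ⟨h1, h2, h3, h4⟩; exact ⟨x.1, ⟨h1, by omega⟩, x.2, ⟨h3, by omega⟩, rfl⟩

set_option maxHeartbeats 2000000 in
theorem pvSweepCol_char (c0 : Char) (r : Int) (cs : List Int) :
    cs.Nodup → ∀ (m : (Int × Int) → Option Char) (cnt : Int),
    (∀ p, (cs.foldl (fun (st : ((Int × Int) → Option Char) × Int) c =>
        if st.1 (r, c) == some c0 then
          (fun p => if p = (r, c) then none else st.1 p, st.2 + 1)
        else st) (m, cnt)).1 p =
      if p.1 = r ∧ p.2 ∈ cs ∧ m p = some c0 then none else m p) ∧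
    ((cs.foldl (fun (st : ((Int × Int) → Option Char) × Int) c =>
        if st.1 (r, c) == some c0 then
          (fun p => if p = (r, c) then none else st.1 p, st.2 + 1)
        else st) (m, cnt)).2 =
      cnt + ((cs.filter (fun c => m (r, c) == some c0)).length : Int)) := by
  induction cs with
  | nil =>
    intro _ m cnt
    constructor
    · intro p
      simp
    · simp
  | cons c cs ih =>
    intro hnd m cnt
    have hcnotin : c ∉ cs := (List.nodup_cons.1 hnd).1
    have hndtl : cs.Nodup := (List.nodup_cons.1 hnd).2
    have hred : ((c :: cs).foldl (fun (st : ((Int × Int) → Option Char) × Int) c =>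
        if st.1 (r, c) == some c0 then
          (fun p => if p = (r, c) then none else st.1 p, st.2 + 1)
        else st) (m, cnt)) =
        (cs.foldl (fun (st : ((Int × Int) → Option Char) × Int) c =>
        if st.1 (r, c) == some c0 then
          (fun p => if p = (r, c) then none else st.1 p, st.2 + 1)
        else st) (if m (r, c) == some c0 then
          ((fun p => if p = (r, c) then none else m p), cnt + 1) else (m, cnt))) := rfl
    rw [hred]
    by_cases hm : (m (r, c) == some c0) = true
    case pos =>
      have hmeq : m (r, c) = some c0 := by simpa using hm
      rw [if_pos hm]
      obtain ⟨F, C⟩ := ih hndtl (fun p => if p = (r, c) then none else m p) (cnt + 1)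
      constructor
      · intro p
        rw [F p]
        by_cases hpc : p = (r, c)
        · subst hpc
          simp [hmeq, hcnotin]
        · rw [if_neg hpc]
          by_cases h1 : p.1 = r
          · by_cases h2 : p.2 = c
            · exact absurd (Prod.ext h1 h2) hpc
            · simp [h1, h2]
          · simp [h1]
      · rw [C]
        have hfc : cs.filter (fun c' =>
            (if ((r, c') : Int × Int) = (r, c) then none else m (r, c')) == some c0) =
            cs.filter (fun c' => m (r, c') == some c0) := by
          apply List.filter_congr
          intro c' hc'
          have hne : ((r, c') : Int × Int) ≠ (r, c) := by
            intro h
            have hcc : c' = c := congrArg Prod.snd h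
            exact hcnotin (hcc ▸ hc')
          simp [hne]
        have hfilter : (c :: cs).filter (fun c' => m (r, c') == some c0) =
            c :: cs.filter (fun c' => m (r, c') == some c0) := by
          simp [List.filter_cons, hm]
        rw [hfc, hfilter]
        simp only [List.length_cons]
        push_cast
        ring
    case neg =>
      have hmne : m (r, c) ≠ some c0 := by simpa using hm
      rw [if_neg hm]
      obtain ⟨F, C⟩ := ih hndtl m cnt
      constructor
      · intro p
        rw [F p]
        by_cases h1 : p.1 = r
        · by_cases h2 : p.2 = c
          · have hp : p = (r, c) := Prod.ext h1 h2
            rw [hp]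
            simp [hmne, hcnotin]
          · simp [h1, h2]
        · simp [h1]
      · have hfilter : (c :: cs).filter (fun c' => m (r, c') == some c0) =
            cs.filter (fun c' => m (r, c') == some c0) := by
          rw [Bool.not_eq_true] at hm
          simp [List.filter_cons, hm]
        rw [C, hfilter]

set_option maxHeartbeats 2000000 in
theorem pvSweepRows_char (c0 : Char) (M : Int) (rs : List Int) :
    rs.Nodup → ∀ (m : (Int × Int) → Option Char) (cnt : Int),
    (∀ p, (rs.foldl (fun st r =>
        (PySem.List.pyRange 1 (M + 1) 1).foldl
          (fun (st : ((Int × Int) → Option Char) × Int) c =>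
            if st.1 (r, c) == some c0 then
              (fun p => if p = (r, c) then none else st.1 p, st.2 + 1)
            else st) st) (m, cnt)).1 p =
      if p.1 ∈ rs ∧ p.2 ∈ PySem.List.pyRange 1 (M + 1) 1 ∧ m p = some c0 then none else m p) ∧
    ((rs.foldl (fun st r =>
        (PySem.List.pyRange 1 (M + 1) 1).foldl
          (fun (st : ((Int × Int) → Option Char) × Int) c =>
            if st.1 (r, c) == some c0 then
              (fun p => if p = (r, c) then none else st.1 p, st.2 + 1)
            else st) st) (m, cnt)).2 =
      cnt + (((rs.flatMap (fun r => (PySem.List.pyRange 1 (M + 1) 1).map (fun c => (r, c)))).filter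
        (fun p => m p == some c0)).length : Int)) := by
  induction rs with
  | nil =>
    intro _ m cnt
    constructor
    · intro p
      simp
    · simp
  | cons r rs ih =>
    intro hnd m cnt
    have hrnotin : r ∉ rs := (List.nodup_cons.1 hnd).1
    have hndtl : rs.Nodup := (List.nodup_cons.1 hnd).2
    rcases hS : ((PySem.List.pyRange 1 (M + 1) 1).foldl
        (fun (st : ((Int × Int) → Option Char) × Int) c =>
          if st.1 (r, c) == some c0 then
            (fun p => if p = (r, c) then none else st.1 p, st.2 + 1)
          else st) (m, cnt)) with ⟨m1, cnt1⟩
    obtain ⟨F1, C1⟩ := pvSweepCol_char c0 r (PySem.List.pyRange 1 (M + 1) 1)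
      (pvRange_nodup _ _) m cnt
    rw [hS] at F1 C1
    have F1' : ∀ p, m1 p = if p.1 = r ∧ p.2 ∈ PySem.List.pyRange 1 (M + 1) 1 ∧
        m p = some c0 then none else m p := F1
    have C1' : cnt1 = cnt +
        (((PySem.List.pyRange 1 (M + 1) 1).filter (fun c => m (r, c) == some c0)).length : Int) :=
      C1
    have hred : ((r :: rs).foldl (fun st r =>
        (PySem.List.pyRange 1 (M + 1) 1).foldl
          (fun (st : ((Int × Int) → Option Char) × Int) c =>
            if st.1 (r, c) == some c0 then
              (fun p => if p = (r, c) then none else st.1 p, st.2 + 1)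
            else st) st) (m, cnt)) =
        (rs.foldl (fun st r =>
        (PySem.List.pyRange 1 (M + 1) 1).foldl
          (fun (st : ((Int × Int) → Option Char) × Int) c =>
            if st.1 (r, c) == some c0 then
              (fun p => if p = (r, c) then none else st.1 p, st.2 + 1)
            else st) st) ((PySem.List.pyRange 1 (M + 1) 1).foldl
          (fun (st : ((Int × Int) → Option Char) × Int) c =>
            if st.1 (r, c) == some c0 then
              (fun p => if p = (r, c) then none else st.1 p, st.2 + 1)
            else st) (m, cnt))) := rfl
    rw [hred, hS]
    obtain ⟨F2, C2⟩ := ih hndtl m1 cnt1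
    constructor
    · intro p
      rw [F2 p, F1' p]
      by_cases hA : p.1 = r
      · simp [hA, hrnotin]
      · simp [hA]
    · rw [C2]
      have hfe : ((rs.flatMap (fun r' => (PySem.List.pyRange 1 (M + 1) 1).map
          (fun c => (r', c)))).filter (fun p => m1 p == some c0)) =
          ((rs.flatMap (fun r' => (PySem.List.pyRange 1 (M + 1) 1).map
          (fun c => (r', c)))).filter (fun p => m p == some c0)) := by
        apply List.filter_congr
        intro p hp
        obtain ⟨r', hr', hpr⟩ := List.mem_flatMap.1 hp
        obtain ⟨c', hc', hpc⟩ := List.mem_map.1 hpr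
        have hp1 : p.1 ≠ r := by
          rw [← hpc]
          intro h
          simp at h
          exact hrnotin (h ▸ hr')
        rw [F1' p]
        simp [hp1]
      rw [hfe, C1', List.flatMap_cons, List.filter_append, List.length_append,
        List.filter_map]
      have hlm : ((PySem.List.pyRange 1 (M + 1) 1).filter
          ((fun p => m p == some c0) ∘ (fun c => ((r, c) : Int × Int)))) =
          ((PySem.List.pyRange 1 (M + 1) 1).filter (fun c => m (r, c) == some c0)) := rfl
      rw [hlm]
      simp only [List.length_map]
      push_cast
      ring

set_option maxHeartbeats 2000000 in
theorem pvSweep_char (mtx : (Int × Int) → Option Char) (c0 : Char) (N M : Int) :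
    (∀ p, ((PySem.List.pyRange 1 (N + 1) 1).foldl (fun st r =>
        (PySem.List.pyRange 1 (M + 1) 1).foldl
          (fun (st : ((Int × Int) → Option Char) × Int) c =>
            if st.1 (r, c) == some c0 then
              (fun p => if p = (r, c) then none else st.1 p, st.2 + 1)
            else st) st) (mtx, 0)).1 p =
      if pvInnerA N M p ∧ mtx p = some c0 then none else mtx p) ∧
    ((PySem.List.pyRange 1 (N + 1) 1).foldl (fun st r =>
        (PySem.List.pyRange 1 (M + 1) 1).foldl
          (fun (st : ((Int × Int) → Option Char) × Int) c =>
            if st.1 (r, c) == some c0 then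
              (fun p => if p = (r, c) then none else st.1 p, st.2 + 1)
            else st) st) (mtx, 0)).2 =
      (((pvProdInner N M).filter (fun p => mtx p == some c0)).length : Int) := by
  obtain ⟨F, C⟩ := pvSweepRows_char c0 M (PySem.List.pyRange 1 (N + 1) 1)
    (pvRange_nodup _ _) mtx 0
  constructor
  · intro p
    rw [F p]
    have hiff : (p.1 ∈ PySem.List.pyRange 1 (N + 1) 1 ∧
        p.2 ∈ PySem.List.pyRange 1 (M + 1) 1 ∧ mtx p = some c0) ↔
        (pvInnerA N M p ∧ mtx p = some c0) := by
      rw [PySem.List.mem_pyRange_one, PySem.List.mem_pyRange_one]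
      constructor
      · rintro ⟨⟨a, b⟩, ⟨c, d⟩, e⟩
        exact ⟨⟨a, by omega, c, by omega⟩, e⟩
      · rintro ⟨⟨a, b, c, d⟩, e⟩
        exact ⟨⟨a, by omega⟩, ⟨c, by omega⟩, e⟩
    exact if_congr hiff rfl rfl
  · rw [C]
    simp [pvProdInner]

/- ---------- dict helpers: erase folds, counting ---------- -/

theorem pvDict_find?_filter (l : List ((Int × Int) × Char)) (p k : Int × Int) :
    (l.filter (fun pr => !pr.1 == p)).find? (fun pr => pr.1 == k) =
      if k = p then none else l.find? (fun pr => pr.1 == k) := by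
  induction l with
  | nil => simp
  | cons a l ih =>
    by_cases hap : a.1 = p
    · rw [List.filter_cons_of_neg (by simp [hap]), ih]
      by_cases hkp : k = p
      · simp [hkp]
      · rw [if_neg hkp, List.find?_cons_of_neg (by simpa [hap] using fun h => hkp h.symm)]
        simp [hkp]
    · rw [List.filter_cons_of_pos (by simp [hap])]
      by_cases hak : a.1 = k
      · rw [List.find?_cons_of_pos (by simp [hak]), List.find?_cons_of_pos (by simp [hak]),
          if_neg (fun h => hap (hak.trans h))]
      · rw [List.find?_cons_of_neg (by simp [hak]), List.find?_cons_of_neg (by simp [hak]), ih]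

theorem pvDict_get?_erase (d : PySem.Dict (Int × Int) Char) (p k : Int × Int) :
    (d.erase p).get? k = if k = p then none else d.get? k := by
  show ((d.items.filter (fun pr => !pr.1 == p)).find? (fun pr => pr.1 == k)).map (·.2) = _
  rw [pvDict_find?_filter]
  by_cases h : k = p <;> simp [h, PySem.Dict.get?]

theorem pvDict_items_eraseFold (d : PySem.Dict (Int × Int) Char) (ks : List (Int × Int)) :
    (ks.foldl (fun d p => d.erase p) d).items =
      d.items.filter (fun pr => decide (pr.1 ∉ ks)) := by
  induction ks generalizing d with
  | nil => simp
  | cons k ks ih =>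
    simp only [List.foldl_cons]
    rw [ih]
    show (d.items.filter (fun pr => !pr.1 == k)).filter _ = _
    rw [List.filter_filter]
    apply List.filter_congr
    intro pr _
    by_cases h1 : pr.1 = k <;> by_cases h2 : pr.1 ∈ ks <;> simp [h1, h2]

theorem pvDict_get?_eraseFold (d : PySem.Dict (Int × Int) Char) (ks : List (Int × Int))
    (k : Int × Int) :
    (ks.foldl (fun d p => d.erase p) d).get? k = if k ∈ ks then none else d.get? k := by
  induction ks generalizing d with
  | nil => simp
  | cons k0 ks ih =>
    simp only [List.foldl_cons]
    rw [ih, pvDict_get?_erase]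
    by_cases h1 : k ∈ ks <;> by_cases h2 : k = k0 <;> simp [h1, h2]

theorem pvDict_size_eraseFold (d : PySem.Dict (Int × Int) Char) (ks : List (Int × Int))
    (hnd : d.keys.Nodup) (hks : ks.Nodup) (hsub : ∀ k ∈ ks, k ∈ d.keys) :
    ((ks.foldl (fun d p => d.erase p) d).size : Int) = (d.size : Int) - ks.length := by
  show (((ks.foldl (fun d p => d.erase p) d).items.length : Int)) = _
  rw [pvDict_items_eraseFold, ← List.countP_eq_length_filter]
  have hkeys : d.keys.countP (fun x => decide (x ∈ ks)) = ks.length := by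
    have hperm : (d.keys.filter (fun x => decide (x ∈ ks))).Perm ks := by
      rw [List.perm_ext_iff_of_nodup (hnd.filter _) hks]
      intro a
      simp only [List.mem_filter, decide_eq_true_eq]
      exact ⟨fun h => h.2, fun h => ⟨hsub a h, h⟩⟩
    rw [List.countP_eq_length_filter]
    exact hperm.length_eq
  have hcp : d.items.length = d.items.countP (fun pr => decide (pr.1 ∈ ks)) +
      d.items.countP (fun pr => decide (pr.1 ∉ ks)) := by
    have h := List.length_eq_countP_add_countP (p := fun pr : (Int × Int) × Char =>
      decide (pr.1 ∈ ks)) (l := d.items)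
    rw [h]
    congr 1
    apply List.countP_congr
    intro x _
    by_cases hx : x.1 ∈ ks <;> simp [hx]
  have hcnt : d.items.countP (fun pr => decide (pr.1 ∈ ks)) = ks.length := by
    have h3 : (d.items.map (·.1)).countP (fun x => decide (x ∈ ks)) =
        d.items.countP (fun pr => decide (pr.1 ∈ ks)) := by
      rw [List.countP_map]; rfl
    rw [← h3]
    exact hkeys
  show ((d.items.countP (fun pr => decide (pr.1 ∉ ks)) : Int)) = (d.items.length : Int) - _
  omega

theorem pvDict_keys_eraseFold (d : PySem.Dict (Int × Int) Char) (ks : List (Int × Int)) :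
    (ks.foldl (fun d p => d.erase p) d).keys.Sublist d.keys := by
  show ((ks.foldl (fun d p => d.erase p) d).items.map (·.1)).Sublist (d.items.map (·.1))
  rw [pvDict_items_eraseFold]
  exact List.Sublist.map _ List.filter_sublist

/- ---------- the initial state ---------- -/

def pvProd0 (N M : Int) : List (Int × Int) :=
  (PySem.List.pyRange 0 N).flatMap (fun r => (PySem.List.pyRange 0 M).map (fun c => (r, c)))

theorem mem_pvProd0 {N M : Int} {x : Int × Int} :
    x ∈ pvProd0 N M ↔ 0 ≤ x.1 ∧ x.1 < N ∧ 0 ≤ x.2 ∧ x.2 < M := by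
  simp only [pvProd0, List.mem_flatMap, List.mem_map, PySem.List.mem_pyRange_one]
  constructor
  · rintro ⟨r, hr, c, hc, rfl⟩; exact ⟨hr.1, hr.2, hc.1, hc.2⟩
  · rintro ⟨h1, h2, h3, h4⟩; exact ⟨x.1, ⟨h1, h2⟩, x.2, ⟨h3, h4⟩, rfl⟩

theorem pvNodup_prodlike (cl : List Int) (hcl : cl.Nodup) :
    ∀ (rl : List Int), rl.Nodup → (rl.flatMap (fun r => cl.map (fun c => ((r, c) : Int × Int)))).Nodup := by
  intro rl
  induction rl with
  | nil => intro _; simp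
  | cons r rl ih =>
    intro hnd
    rw [List.flatMap_cons]
    refine List.Nodup.append (hcl.map (fun a b h => congrArg Prod.snd h))
      (ih (List.nodup_cons.1 hnd).2) ?_
    intro a ha hb
    obtain ⟨c, -, hac⟩ := List.mem_map.1 ha
    obtain ⟨r', hr', hpr⟩ := List.mem_flatMap.1 hb
    obtain ⟨c', -, hac'⟩ := List.mem_map.1 hpr
    have h1 : a.1 = r := by rw [← hac]
    have h2 : a.1 = r' := by rw [← hac']
    exact (List.nodup_cons.1 hnd).1 (by rw [← h1.symm.trans h2] at hr'; exact hr')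

theorem nodup_pvProd0 (N M : Int) : (pvProd0 N M).Nodup :=
  pvNodup_prodlike _ (pvRange_nodup 0 M) _ (pvRange_nodup 0 N)

theorem pvGridRow_items (storage : List String) (M : Int) (r : Int)
    (d : PySem.Dict (Int × Int) Char)
    (hcell : ∀ c : Int, 0 ≤ c → c < M → ∃ ch, pvCellAt storage r c = some ch)
    (hfresh : ∀ k ∈ d.keys, k.1 ≠ r) :
    ((PySem.List.pyRange 0 M 1).foldl (fun (d : PySem.Dict (Int × Int) Char) c =>
      match pvCellAt storage r c with
      | some ch => d.insert (r, c) ch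
      | none => d) d).items =
    d.items ++ (PySem.List.pyRange 0 M 1).map
      (fun c => (((r, c) : Int × Int), (pvCellAt storage r c).getD 'A')) := by
  have hco : ∀ (d' : PySem.Dict (Int × Int) Char), ∀ c ∈ PySem.List.pyRange 0 M 1,
      (match pvCellAt storage r c with
       | some ch => d'.insert (r, c) ch
       | none => d') = d'.insert (r, c) ((pvCellAt storage r c).getD 'A') := by
    intro d' c hc
    obtain ⟨h1, h2⟩ := PySem.List.mem_pyRange_one.1 hc
    obtain ⟨ch, hch⟩ := hcell c h1 h2
    rw [hch]
    rfl
  rw [PySem.List.foldl_congr_mem _ _ _ _ hco]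
  rw [PySem.Dict.items_foldl_insert_fresh (PySem.List.pyRange 0 M 1)
    (fun c => ((r, c) : Int × Int)) (fun c => (pvCellAt storage r c).getD 'A') d ?_ ?_]
  · intro c hc
    cases h : d.contains (r, c)
    · rfl
    · exact absurd rfl (hfresh (r, c) ((PySem.Dict.contains_iff_mem_keys _ _).1 h))
  · exact (pvRange_nodup 0 M).map (fun a b h => congrArg Prod.snd h)

theorem pvGridRows_char (storage : List String) (M : Int) :
    ∀ (rl : List Int), rl.Nodup →
    ∀ (d : PySem.Dict (Int × Int) Char),
    (∀ r ∈ rl, ∀ c : Int, 0 ≤ c → c < M → ∃ ch, pvCellAt storage r c = some ch) →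
    (∀ k ∈ d.keys, k.1 ∉ rl) →
    (rl.foldl (fun d r => (PySem.List.pyRange 0 M 1).foldl
      (fun (d : PySem.Dict (Int × Int) Char) c =>
        match pvCellAt storage r c with
        | some ch => d.insert (r, c) ch
        | none => d) d) d).items =
    d.items ++ rl.flatMap (fun r => (PySem.List.pyRange 0 M 1).map
      (fun c => (((r, c) : Int × Int), (pvCellAt storage r c).getD 'A'))) := by
  intro rl
  induction rl with
  | nil =>
    intro _ d _ _
    simp
  | cons r rl ih =>
    intro hnd d hcell hkeys
    simp only [List.foldl_cons]
    have hrow := pvGridRow_items storage M r d (fun c h1 h2 => hcell r (by simp) c h1 h2)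
      (fun k hk he => hkeys k hk (by simp [he]))
    have hkeysrow : ((PySem.List.pyRange 0 M 1).foldl
        (fun (d : PySem.Dict (Int × Int) Char) c =>
          match pvCellAt storage r c with
          | some ch => d.insert (r, c) ch
          | none => d) d).keys =
        d.keys ++ (PySem.List.pyRange 0 M 1).map (fun c => ((r, c) : Int × Int)) := by
      show ((PySem.List.pyRange 0 M 1).foldl _ d).items.map (·.1) = _
      rw [hrow, List.map_append, List.map_map]
      rfl
    rw [ih (List.nodup_cons.1 hnd).2 _ (fun r' hr' => hcell r' (by simp [hr'])) ?_]
    · rw [hrow, List.flatMap_cons, List.append_assoc]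
    · intro k hk hmem
      rw [hkeysrow] at hk
      rcases List.mem_append.1 hk with h | h
      · exact hkeys k h (by simp [hmem])
      · obtain ⟨c, -, hkc⟩ := List.mem_map.1 h
        have h1 : k.1 = r := by rw [← hkc]
        exact (List.nodup_cons.1 hnd).1 (h1 ▸ hmem)

theorem pvGridInit_char (storage : List String) (N M : Int)
    (hcell : ∀ r c : Int, 0 ≤ r → r < N → 0 ≤ c → c < M →
      ∃ ch, pvCellAt storage r c = some ch) :
    (pvGridInit storage N M).keys = pvProd0 N M ∧
    (∀ k : Int × Int, (pvGridInit storage N M).get? k =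
      if 0 ≤ k.1 ∧ k.1 < N ∧ 0 ≤ k.2 ∧ k.2 < M then pvCellAt storage k.1 k.2 else none) := by
  have hitems : (pvGridInit storage N M).items =
      (PySem.List.pyRange 0 N 1).flatMap (fun r => (PySem.List.pyRange 0 M 1).map
        (fun c => (((r, c) : Int × Int), (pvCellAt storage r c).getD 'A'))) := by
    have h := pvGridRows_char storage M (PySem.List.pyRange 0 N 1) (pvRange_nodup 0 N)
      PySem.Dict.empty
      (fun r hr c h1 h2 => hcell r c (PySem.List.mem_pyRange_one.1 hr).1
        (PySem.List.mem_pyRange_one.1 hr).2 h1 h2)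
      (by intro k hk; simp [PySem.Dict.keys_empty] at hk)
    simpa [pvGridInit] using h
  have hkeys : (pvGridInit storage N M).keys = pvProd0 N M := by
    show (pvGridInit storage N M).items.map (·.1) = _
    rw [hitems, List.map_flatMap]
    simp only [List.map_map]
    rfl
  refine ⟨hkeys, fun k => ?_⟩
  by_cases hk : 0 ≤ k.1 ∧ k.1 < N ∧ 0 ≤ k.2 ∧ k.2 < M
  · rw [if_pos hk]
    obtain ⟨ch, hch⟩ := hcell k.1 k.2 hk.1 hk.2.1 hk.2.2.1 hk.2.2.2
    rw [hch]
    apply PySem.Dict.get?_of_mem_items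
    · rw [hitems]
      apply List.mem_flatMap.2
      refine ⟨k.1, PySem.List.mem_pyRange_one.2 ⟨hk.1, hk.2.1⟩, ?_⟩
      apply List.mem_map.2
      refine ⟨k.2, PySem.List.mem_pyRange_one.2 ⟨hk.2.2.1, hk.2.2.2⟩, ?_⟩
      rw [hch]
      rfl
    · rw [hkeys]
      exact nodup_pvProd0 N M
  · rw [if_neg hk]
    rw [PySem.Dict.get?_eq_none_iff_not_mem_keys, hkeys]
    intro hmem
    exact hk (mem_pvProd0.1 hmem)

theorem length_pvProd0 {N M : Int} :
    ((pvProd0 N M).length : Int) = (N.toNat : Int) * (M.toNat : Int) := by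
  have h1 : (pvProd0 N M).length = N.toNat * M.toNat := by
    simp only [pvProd0, List.length_flatMap, List.length_map, pvRange_len]
    rw [List.map_const', List.sum_replicate, pvRange_len]
    simp
  rw [h1]
  push_cast
  ring

/- ---------- the simulation relation ---------- -/

def pvSimRel (N M : Int) (a : ((Int × Int) → Option Char) × Int)
    (b : PySem.Dict (Int × Int) Char × PySem.Set (Int × Int)) : Prop :=
  (∀ x : Int × Int, a.1 (pvSh x) = b.1.get? x) ∧
  b.1.keys.Nodup ∧
  (∀ k ∈ b.1.keys, 0 ≤ k.1 ∧ k.1 < N ∧ 0 ≤ k.2 ∧ k.2 < M) ∧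
  (b.2 : List (Int × Int)).Nodup ∧
  (∀ x, x ∈ b.2 ↔ pvZ a.1 N M (pvSh x)) ∧
  a.2 = (b.1.size : Int)

-- a matrix related to a bounded dict is empty outside the inner region
theorem pvSimRel_outer {N M a b} (h : pvSimRel N M a b) :
    ∀ p, ¬ pvInnerA N M p → a.1 p = none := by
  intro p hp
  obtain ⟨hrel, hnd, hbnd, -, -, -⟩ := h
  have : a.1 p = b.1.get? (pvUnsh p) := by rw [← hrel (pvUnsh p), pvSh_unsh]
  rw [this, PySem.Dict.get?_eq_none_iff_not_mem_keys]
  intro hmem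
  have := hbnd _ hmem
  simp only [pvUnsh] at this
  simp only [pvInnerA] at hp
  omega

theorem nodup_pvProdInner (N M : Int) : (pvProdInner N M).Nodup :=
  pvNodup_prodlike _ (pvRange_nodup 1 (M + 1)) _ (pvRange_nodup 1 (N + 1))

-- the common tail of one request in B: erase the removed cells, then grow the
-- outside region from the removed cells that touch it
set_option maxHeartbeats 2000000 in
theorem pvStep_grow_sim (N M : Int) (hN : 0 ≤ N) (hM : 0 ≤ M)
    (mtx : (Int × Int) → Option Char) (cnt : Int)
    (grid : PySem.Dict (Int × Int) Char) (outside : PySem.Set (Int × Int))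
    (h : pvSimRel N M (mtx, cnt) (grid, outside)) (ch : Char)
    (removed : List (Int × Int)) (hndrem : removed.Nodup)
    (hrem : ∀ x ∈ removed, grid.get? x = some ch)
    (mtx' : (Int × Int) → Option Char)
    (hmtx' : ∀ p, mtx' p = if p ∈ removed.map pvSh then none else mtx p) :
    pvSimRel N M (mtx', cnt - removed.length)
      (removed.foldl (fun d p => d.erase p) grid,
       pvGrow (removed.foldl (fun d p => d.erase p) grid) N M
         (((N + 2) * (M + 2)).toNat + 1)
         (removed.filter (fun p => (pvNbrs p).any (fun q => PySem.Set.contains outside q)))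
         (PySem.Set.update outside
           (removed.filter (fun p => (pvNbrs p).any (fun q => PySem.Set.contains outside q))))) := by
  obtain ⟨hrel, hknd, hkb, hond, hoiff, hcnt⟩ := h
  simp only at hrel hoiff hcnt
  have houter : ∀ p, ¬ pvInnerA N M p → mtx p = none :=
    pvSimRel_outer (a := (mtx, cnt)) (b := (grid, outside)) ⟨hrel, hknd, hkb, hond, hoiff, hcnt⟩
  have h00 : mtx (0, 0) = none := houter (0, 0) (by rintro ⟨h1, -⟩; omega)
  have hkeysub : ∀ x ∈ removed, x ∈ grid.keys := by
    intro x hx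
    by_contra hc
    have hnone := (PySem.Dict.get?_eq_none_iff_not_mem_keys grid x).2 hc
    rw [hrem x hx] at hnone
    cases hnone
  have hinner : ∀ x ∈ removed, pvInnerA N M (pvSh x) := by
    intro x hx
    have hb := hkb x (hkeysub x hx)
    simp only [pvSh, pvInnerA]
    omega
  have hrel' : ∀ x, mtx' (pvSh x) =
      (removed.foldl (fun d p => d.erase p) grid).get? x := by
    intro x
    rw [hmtx' (pvSh x), pvDict_get?_eraseFold]
    by_cases hx : x ∈ removed
    · rw [if_pos (List.mem_map_of_mem hx), if_pos hx]
    · rw [if_neg ?_, if_neg hx]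
      · exact hrel x
      · intro hmem
        obtain ⟨y, hy, hxy⟩ := List.mem_map.1 hmem
        exact hx (pvSh_inj hxy ▸ hy)
  have hmono : ∀ p, mtx p = none → mtx' p = none := by
    intro p hp
    rw [hmtx' p]
    by_cases hc : p ∈ removed.map pvSh
    · rw [if_pos hc]
    · rw [if_neg hc]
      exact hp
  have hout' : ∀ p, ¬ pvInb N M p → mtx' p = none := by
    intro p hp
    exact hmono p (houter p (fun hin => hp (by obtain ⟨a, b, c, d⟩ := hin; exact ⟨by omega, by omega, by omega, by omega⟩)))
  have hofree : ∀ x ∈ outside, grid.get? x = none := by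
    intro x hx
    rw [← hrel x]
    exact pvZ_none h00 ((hoiff x).1 hx)
  -- the grow invariant at the start of the while loop
  have hstacksub : ∀ x ∈ removed.filter
      (fun p => (pvNbrs p).any (fun q => PySem.Set.contains outside q)), x ∈ removed :=
    fun x hx => (List.mem_filter.1 hx).1
  have hstacknd : (removed.filter
      (fun p => (pvNbrs p).any (fun q => PySem.Set.contains outside q))).Nodup :=
    hndrem.filter _
  have hupdnd : (PySem.Set.update outside (removed.filter
      (fun p => (pvNbrs p).any (fun q => PySem.Set.contains outside q))) :
      List (Int × Int)).Nodup := PySem.Set.nodup_update _ _ hond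
  have hcorner : ((-1, -1) : Int × Int) ∈ outside := by
    apply (hoiff _).2
    have hsh : pvSh ((-1 : Int), (-1 : Int)) = ((0 : Int), (0 : Int)) := by
      simp [pvSh]
    rw [hsh]
    exact pvZ.base
  have hseedZ : ∀ x ∈ removed.filter
      (fun p => (pvNbrs p).any (fun q => PySem.Set.contains outside q)),
      pvZ mtx' N M (pvSh x) := by
    intro x hx
    obtain ⟨hxr, hpred⟩ := List.mem_filter.1 hx
    obtain ⟨q, hq, hqout⟩ := List.any_eq_true.1 hpred
    have hqmem : q ∈ outside := (PySem.Set.contains_iff _ _).1 hqout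
    refine pvZ.step (pvSh q) (pvSh x) (pvZ_mono (fun p hp => hmono p hp) ((hoiff q).1 hqmem))
      ?_ ?_ ?_
    · rw [pvNbrs_sh]
      exact List.mem_map_of_mem (pvNbrs_symm.1 hq)
    · have := hinner x hxr
      obtain ⟨a, b, c, d⟩ := this
      exact ⟨by omega, by omega, by omega, by omega⟩
    · rw [hmtx' (pvSh x)]
      rw [if_pos (List.mem_map_of_mem hxr)]
  have hGinv : pvGrowInv (removed.foldl (fun d p => d.erase p) grid) mtx' N M
      (removed.filter (fun p => (pvNbrs p).any (fun q => PySem.Set.contains outside q)))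
      (PySem.Set.update outside
        (removed.filter (fun p => (pvNbrs p).any (fun q => PySem.Set.contains outside q)))) := by
    refine ⟨(PySem.Set.mem_update _ _ _).2 (Or.inl hcorner), hstacknd, hupdnd, ?_, ?_, ?_, ?_⟩
    · intro x hx
      exact (PySem.Set.mem_update _ _ _).2 (Or.inr hx)
    · -- every cell of the extended outside is empty in the new grid
      intro x hx
      rw [pvDict_contains_false_iff, pvDict_get?_eraseFold]
      rcases (PySem.Set.mem_update _ _ _).1 hx with hxo | hxs
      · by_cases hxr : x ∈ removed
        · rw [if_pos hxr]
        · rw [if_neg hxr]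
          exact hofree x hxo
      · rw [if_pos (hstacksub x hxs)]
    · -- every cell of the extended outside is reachable in the new matrix
      intro x hx
      rcases (PySem.Set.mem_update _ _ _).1 hx with hxo | hxs
      · exact pvZ_mono hmono ((hoiff x).1 hxo)
      · exact hseedZ x hxs
    · -- closedness of the non-stack part
      intro x hx hxs nq hnq hnqinb hnqfree
      have hxo : x ∈ outside := by
        rcases (PySem.Set.mem_update _ _ _).1 hx with hxo | hxs'
        · exact hxo
        · exact absurd hxs' hxs
      rw [pvDict_contains_false_iff, pvDict_get?_eraseFold] at hnqfree
      by_cases hnqr : nq ∈ removed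
      · -- a removed neighbour of an old outside cell is a seed
        apply (PySem.Set.mem_update _ _ _).2
        apply Or.inr
        apply List.mem_filter.2
        refine ⟨hnqr, List.any_eq_true.2 ⟨x, pvNbrs_symm.1 hnq, (PySem.Set.contains_iff _ _).2 hxo⟩⟩
      · -- an old empty neighbour was already outside
        rw [if_neg hnqr] at hnqfree
        apply (PySem.Set.mem_update _ _ _).2
        apply Or.inl
        apply (hoiff nq).2
        refine pvZ.step (pvSh x) (pvSh nq) ((hoiff x).1 hxo) ?_ ?_ ?_
        · rw [pvNbrs_sh]
          exact List.mem_map_of_mem hnq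
        · rw [← pvInbB_iff]
          exact hnqinb
        · rw [hrel]
          exact hnqfree
  -- run the grow loop
  have hstackle : (removed.filter
      (fun p => (pvNbrs p).any (fun q => PySem.Set.contains outside q))).length ≤
      (PySem.Set.update outside (removed.filter
        (fun p => (pvNbrs p).any (fun q => PySem.Set.contains outside q))) :
        List (Int × Int)).length :=
    (hstacknd.subperm (fun x hx => (PySem.Set.mem_update _ _ _).2 (Or.inr hx))).length_le
  obtain ⟨hGnd, hGiff⟩ := pvGrow_run (removed.foldl (fun d p => d.erase p) grid) mtx' N M
    hN hM hrel' hout' (((N + 2) * (M + 2)).toNat + 1)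
    (removed.filter (fun p => (pvNbrs p).any (fun q => PySem.Set.contains outside q)))
    (PySem.Set.update outside
      (removed.filter (fun p => (pvNbrs p).any (fun q => PySem.Set.contains outside q))))
    hGinv (by
      have hupdinb : ∀ z ∈ ((PySem.Set.update outside (removed.filter
          (fun p => (pvNbrs p).any (fun q => PySem.Set.contains outside q)))).map pvSh),
          pvInb N M z := by
        intro z hz
        obtain ⟨y, hy, rfl⟩ := List.mem_map.1 hz
        rcases (PySem.Set.mem_update _ _ _).1 hy with hyo | hys
        · exact pvZ_inb hN hM ((hoiff y).1 hyo)
        · obtain ⟨a, b, c, d⟩ := hinner y (hstacksub y hys)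
          exact ⟨by omega, by omega, by omega, by omega⟩
      have hupdbd := pvNodup_le_box hN hM (hupdnd.map (fun a b hab => pvSh_inj hab)) hupdinb
      rw [List.length_map] at hupdbd
      have harith : ∀ (s u bnd : ℕ), s ≤ u → u ≤ bnd → s + (bnd - u) ≤ bnd + 1 := by
        intro s u bnd hsu hub
        omega
      exact harith _ _ _ hstackle hupdbd)
  refine ⟨hrel', ?_, ?_, hGnd, hGiff, ?_⟩
  · exact (pvDict_keys_eraseFold grid removed).nodup hknd
  · intro k hk
    exact hkb k ((pvDict_keys_eraseFold grid removed).subset hk)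
  · simp only
    rw [pvDict_size_eraseFold grid removed hknd hndrem hkeysub, ← hcnt]

set_option maxHeartbeats 2000000 in
theorem pvStep_sim (N M : Int) (hN : 0 ≤ N) (hM : 0 ≤ M)
    (mtx : (Int × Int) → Option Char) (cnt : Int)
    (grid : PySem.Dict (Int × Int) Char) (outside : PySem.Set (Int × Int))
    (h : pvSimRel N M (mtx, cnt) (grid, outside)) (req : String) (hreq : req ≠ "") :
    pvSimRel N M ((pvSearchA mtx req N M).1, cnt - (pvSearchA mtx req N M).2)
      (pvStepB N M (grid, outside) req) := by
  obtain ⟨hrel, hknd, hkb, hond, hoiff, hcnt⟩ := h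
  have hsim : pvSimRel N M (mtx, cnt) (grid, outside) := ⟨hrel, hknd, hkb, hond, hoiff, hcnt⟩
  simp only at hrel hoiff hcnt
  have houter : ∀ p, ¬ pvInnerA N M p → mtx p = none :=
    pvSimRel_outer (a := (mtx, cnt)) (b := (grid, outside)) hsim
  have h00 : mtx (0, 0) = none := houter (0, 0) (by rintro ⟨h1, -⟩; omega)
  obtain ⟨ch, chs, hlist⟩ : ∃ c l, req.toList = c :: l := by
    cases hcase : req.toList with
    | nil => exact absurd (by rwa [String.toList_eq_nil_iff] at hcase) hreq
    | cons c l => exact ⟨c, l, rfl⟩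
  by_cases hlen1 : (PySem.Str.len req == 1) = true
  case pos =>
    -- single-character request: the BFS branch
    have hl1 : req.toList.length = 1 := by
      have h1 := beq_iff_eq.1 hlen1
      rw [PySem.Str.len_eq] at h1
      exact_mod_cast h1
    have hchs : chs = [] := by
      rw [hlist] at hl1
      simpa using hl1
    subst hchs
    have hreqof : req = String.ofList [ch] := by
      conv_lhs => rw [← String.ofList_toList (s := req)]
      rw [hlist]
    have hA : pvSearchA mtx req N M =
        (fun p => if p ∈ pvBfsA mtx req N M (((N + 2) * (M + 2)).toNat + 1)
            [(0, 0)] [(0, 0)] [] then none else mtx p,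
         ((pvBfsA mtx req N M (((N + 2) * (M + 2)).toNat + 1)
            [(0, 0)] [(0, 0)] []).length : Int)) := by
      unfold pvSearchA
      rw [if_pos hlen1]
    have hBstep : pvStepB N M (grid, outside) req =
        (((grid.items.filter (fun pv => pv.2 == ch &&
            (pvNbrs pv.1).any (fun q => PySem.Set.contains outside q))).map (·.1)).foldl
          (fun d p => d.erase p) grid,
         pvGrow (((grid.items.filter (fun pv => pv.2 == ch &&
            (pvNbrs pv.1).any (fun q => PySem.Set.contains outside q))).map (·.1)).foldl
            (fun d p => d.erase p) grid) N M (((N + 2) * (M + 2)).toNat + 1)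
          (((grid.items.filter (fun pv => pv.2 == ch &&
            (pvNbrs pv.1).any (fun q => PySem.Set.contains outside q))).map (·.1)).filter
            (fun p => (pvNbrs p).any (fun q => PySem.Set.contains outside q)))
          (PySem.Set.update outside
            (((grid.items.filter (fun pv => pv.2 == ch &&
              (pvNbrs pv.1).any (fun q => PySem.Set.contains outside q))).map (·.1)).filter
              (fun p => (pvNbrs p).any (fun q => PySem.Set.contains outside q))))) := by
      unfold pvStepB
      rw [hlist]
      simp only [if_pos hlen1]
    obtain ⟨hndcoll, hcoll⟩ := pvBfsA_char mtx req N M hN hM h00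
    have hndrem : ((grid.items.filter (fun pv => pv.2 == ch &&
        (pvNbrs pv.1).any (fun q => PySem.Set.contains outside q))).map (·.1)).Nodup := by
      have hsub : (((grid.items.filter (fun pv => pv.2 == ch &&
          (pvNbrs pv.1).any (fun q => PySem.Set.contains outside q))).map (·.1))).Sublist
          (grid.items.map (·.1)) := List.Sublist.map _ List.filter_sublist
      exact hsub.nodup hknd
    have hmatch_iff : ∀ p, pvMatchA mtx req p ↔ mtx p = some ch := by
      intro p
      constructor
      · rintro ⟨c', hc', hbeq⟩
        have hre : req = String.ofList [c'] := eq_of_beq hbeq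
        have hl : ([ch] : List Char) = [c'] := by
          have h2 := congrArg String.toList (hreqof.symm.trans hre)
          simpa using h2
        have hcc : ch = c' := by injection hl
        rw [hcc]
        exact hc'
      · intro hp
        exact ⟨ch, hp, by rw [hreqof]; simp⟩
    have hremiff : ∀ x, x ∈ ((grid.items.filter (fun pv => pv.2 == ch &&
        (pvNbrs pv.1).any (fun q => PySem.Set.contains outside q))).map (·.1)) ↔
        grid.get? x = some ch ∧ ∃ q ∈ pvNbrs x, q ∈ outside := by
      intro x
      constructor
      · intro hx
        obtain ⟨pv, hpv, hpvx⟩ := List.mem_map.1 hx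
        obtain ⟨hpvi, hpred⟩ := List.mem_filter.1 hpv
        rw [Bool.and_eq_true] at hpred
        obtain ⟨hval, hadj⟩ := hpred
        have hveq : pv.2 = ch := by simpa using hval
        have hget : grid.get? pv.1 = some pv.2 :=
          (PySem.Dict.get?_eq_some_iff_mem_items _ _ _ hknd).2 (by
            have : pv = (pv.1, pv.2) := rfl
            rwa [← this])
        refine ⟨by rw [← hpvx, hget, hveq], ?_⟩
        obtain ⟨q, hq, hqc⟩ := List.any_eq_true.1 hadj
        rw [← hpvx]
        exact ⟨q, hq, (PySem.Set.contains_iff _ _).1 hqc⟩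
      · rintro ⟨hget, q, hq, hqo⟩
        apply List.mem_map.2
        refine ⟨(x, ch), ?_, rfl⟩
        apply List.mem_filter.2
        refine ⟨(PySem.Dict.get?_eq_some_iff_mem_items _ _ _ hknd).1 hget, ?_⟩
        rw [Bool.and_eq_true]
        exact ⟨by simp, List.any_eq_true.2 ⟨q, hq, (PySem.Set.contains_iff _ _).2 hqo⟩⟩
    have hcoll_iff : ∀ x, pvSh x ∈ pvBfsA mtx req N M (((N + 2) * (M + 2)).toNat + 1)
        [(0, 0)] [(0, 0)] [] ↔ x ∈ ((grid.items.filter (fun pv => pv.2 == ch &&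
        (pvNbrs pv.1).any (fun q => PySem.Set.contains outside q))).map (·.1)) := by
      intro x
      rw [hcoll (pvSh x), hremiff x]
      constructor
      · rintro ⟨hinb, hmA, r, hZ, hnb⟩
        have hmx : mtx (pvSh x) = some ch := (hmatch_iff _).1 hmA
        refine ⟨by rw [← hrel x]; exact hmx, pvUnsh r, ?_, (hoiff _).2 (by rwa [pvSh_unsh])⟩
        have hu := pvNbrs_unsh hnb
        rw [pvUnsh_sh] at hu
        exact pvNbrs_symm.1 hu
      · rintro ⟨hget, q, hq, hqo⟩
        have hmx : mtx (pvSh x) = some ch := by rw [hrel x]; exact hget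
        have hinner : pvInnerA N M (pvSh x) := by
          by_contra hni
          rw [houter _ hni] at hmx
          cases hmx
        obtain ⟨a, b, c, d⟩ := hinner
        refine ⟨⟨by omega, by omega, by omega, by omega⟩, (hmatch_iff _).2 hmx,
          pvSh q, (hoiff q).1 hqo, ?_⟩
        rw [pvNbrs_sh]
        exact List.mem_map_of_mem (pvNbrs_symm.1 hq)
    have hpermlen : (pvBfsA mtx req N M (((N + 2) * (M + 2)).toNat + 1)
        [(0, 0)] [(0, 0)] []).length = ((grid.items.filter (fun pv => pv.2 == ch &&
        (pvNbrs pv.1).any (fun q => PySem.Set.contains outside q))).map (·.1)).length := by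
      have hperm : ((((grid.items.filter (fun pv => pv.2 == ch &&
          (pvNbrs pv.1).any (fun q => PySem.Set.contains outside q))).map (·.1))).map
          pvSh).Perm (pvBfsA mtx req N M (((N + 2) * (M + 2)).toNat + 1)
          [(0, 0)] [(0, 0)] []) := by
        rw [List.perm_ext_iff_of_nodup (hndrem.map (fun a b hab => pvSh_inj hab)) hndcoll]
        intro y
        constructor
        · intro hy
          obtain ⟨x, hx, rfl⟩ := List.mem_map.1 hy
          exact (hcoll_iff x).2 hx
        · intro hy
          have h2 : pvSh (pvUnsh y) ∈ pvBfsA mtx req N M (((N + 2) * (M + 2)).toNat + 1)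
              [(0, 0)] [(0, 0)] [] := by rwa [pvSh_unsh]
          exact List.mem_map.2 ⟨pvUnsh y, (hcoll_iff _).1 h2, by rw [pvSh_unsh]⟩
      have hle := hperm.length_eq
      rw [List.length_map] at hle
      exact hle.symm
    rw [hA, hBstep]
    simp only
    rw [hpermlen]
    apply pvStep_grow_sim N M hN hM mtx cnt grid outside hsim ch _ hndrem
      (fun x hx => ((hremiff x).1 hx).1)
    intro p
    by_cases hp : p ∈ pvBfsA mtx req N M (((N + 2) * (M + 2)).toNat + 1) [(0, 0)] [(0, 0)] []
    · rw [if_pos hp, if_pos ?_]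
      have h2 : pvSh (pvUnsh p) ∈ pvBfsA mtx req N M (((N + 2) * (M + 2)).toNat + 1)
          [(0, 0)] [(0, 0)] [] := by rwa [pvSh_unsh]
      exact List.mem_map.2 ⟨pvUnsh p, (hcoll_iff _).1 h2, by rw [pvSh_unsh]⟩
    · rw [if_neg hp, if_neg ?_]
      intro hmem
      obtain ⟨x, hx, rfl⟩ := List.mem_map.1 hmem
      exact hp ((hcoll_iff x).2 hx)
  case neg =>
    -- multi-character request: the full sweep branch
    have hA : pvSearchA mtx req N M =
        (PySem.List.pyRange 1 (N + 1) 1).foldl (fun st r =>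
          (PySem.List.pyRange 1 (M + 1) 1).foldl
            (fun (st : ((Int × Int) → Option Char) × Int) c =>
              if st.1 (r, c) == some ch then
                (fun p => if p = (r, c) then none else st.1 p, st.2 + 1)
              else st) st) (mtx, 0) := by
      unfold pvSearchA
      rw [if_neg hlen1, hlist]
    have hBstep : pvStepB N M (grid, outside) req =
        (((grid.items.filter (fun pv => pv.2 == ch)).map (·.1)).foldl
          (fun d p => d.erase p) grid,
         pvGrow (((grid.items.filter (fun pv => pv.2 == ch)).map (·.1)).foldl
            (fun d p => d.erase p) grid) N M (((N + 2) * (M + 2)).toNat + 1)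
          (((grid.items.filter (fun pv => pv.2 == ch)).map (·.1)).filter
            (fun p => (pvNbrs p).any (fun q => PySem.Set.contains outside q)))
          (PySem.Set.update outside
            (((grid.items.filter (fun pv => pv.2 == ch)).map (·.1)).filter
              (fun p => (pvNbrs p).any (fun q => PySem.Set.contains outside q))))) := by
      have hcond : (PySem.Str.len req == 1) = false := by
        cases hb : (PySem.Str.len req == 1)
        · rfl
        · exact absurd hb hlen1
      unfold pvStepB
      rw [hlist, hcond]
      rfl
    obtain ⟨FS, CS⟩ := pvSweep_char mtx ch N M
    have hndrem : ((grid.items.filter (fun pv => pv.2 == ch)).map (·.1)).Nodup := by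
      have hsub : ((grid.items.filter (fun pv => pv.2 == ch)).map (·.1)).Sublist
          (grid.items.map (·.1)) := List.Sublist.map _ List.filter_sublist
      exact hsub.nodup hknd
    have hremiff : ∀ x, x ∈ ((grid.items.filter (fun pv => pv.2 == ch)).map (·.1)) ↔
        grid.get? x = some ch := by
      intro x
      constructor
      · intro hx
        obtain ⟨pv, hpv, hpvx⟩ := List.mem_map.1 hx
        obtain ⟨hpvi, hpred⟩ := List.mem_filter.1 hpv
        have hveq : pv.2 = ch := by simpa using hpred
        have hget : grid.get? pv.1 = some pv.2 :=
          (PySem.Dict.get?_eq_some_iff_mem_items _ _ _ hknd).2 (by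
            have : pv = (pv.1, pv.2) := rfl
            rwa [← this])
        rw [← hpvx, hget, hveq]
      · intro hget
        apply List.mem_map.2
        refine ⟨(x, ch), ?_, rfl⟩
        apply List.mem_filter.2
        exact ⟨(PySem.Dict.get?_eq_some_iff_mem_items _ _ _ hknd).1 hget, by simp⟩
    have hS_iff : ∀ y, y ∈ (pvProdInner N M).filter (fun p => mtx p == some ch) ↔
        pvInnerA N M y ∧ mtx y = some ch := by
      intro y
      rw [List.mem_filter, mem_pvProdInner]
      constructor
      · rintro ⟨h1, h2⟩
        exact ⟨h1, by simpa using h2⟩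
      · rintro ⟨h1, h2⟩
        exact ⟨h1, by simp [h2]⟩
    have hmem_iff : ∀ y, (pvInnerA N M y ∧ mtx y = some ch) ↔
        y ∈ (((grid.items.filter (fun pv => pv.2 == ch)).map (·.1)).map pvSh) := by
      intro y
      constructor
      · rintro ⟨hin, hmy⟩
        apply List.mem_map.2
        refine ⟨pvUnsh y, (hremiff _).2 ?_, by rw [pvSh_unsh]⟩
        rw [← hrel (pvUnsh y), pvSh_unsh]
        exact hmy
      · intro hy
        obtain ⟨x, hx, rfl⟩ := List.mem_map.1 hy
        have hget := (hremiff x).1 hx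
        have hmx : mtx (pvSh x) = some ch := by rw [hrel x]; exact hget
        have hinner : pvInnerA N M (pvSh x) := by
          by_contra hni
          rw [houter _ hni] at hmx
          cases hmx
        exact ⟨hinner, hmx⟩
    have hcntlen : ((pvProdInner N M).filter (fun p => mtx p == some ch)).length =
        ((grid.items.filter (fun pv => pv.2 == ch)).map (·.1)).length := by
      have hperm : ((((grid.items.filter (fun pv => pv.2 == ch)).map (·.1))).map
          pvSh).Perm ((pvProdInner N M).filter (fun p => mtx p == some ch)) := by
        rw [List.perm_ext_iff_of_nodup (hndrem.map (fun a b hab => pvSh_inj hab))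
          ((nodup_pvProdInner N M).filter _)]
        intro y
        rw [hS_iff y]
        constructor
        · intro hy
          exact (hmem_iff y).2 hy
        · intro hy
          exact (hmem_iff y).1 hy
      have hle := hperm.length_eq
      rw [List.length_map] at hle
      exact hle.symm
    rw [hA, hBstep]
    rw [CS, hcntlen]
    apply pvStep_grow_sim N M hN hM mtx cnt grid outside hsim ch _ hndrem
      (fun x hx => (hremiff x).1 hx)
    intro p
    rw [FS p]
    by_cases hp : pvInnerA N M p ∧ mtx p = some ch
    · rw [if_pos hp, if_pos ((hmem_iff p).1 hp)]
    · rw [if_neg hp, if_neg (fun hmem => hp ((hmem_iff p).2 hmem))]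

-- proof-side abbreviation for the M computed by both ports
def pvM0 (storage : List String) : Int :=
  match storage with
  | [] => 0
  | s :: _ => PySem.Str.len s

theorem pvRing_mem {N M : Int} {x : Int × Int} : x ∈ pvRing N M ↔
    ((-1 ≤ x.1 ∧ x.1 ≤ N ∧ -1 ≤ x.2 ∧ x.2 ≤ M) ∧
     (x.1 = -1 ∨ x.1 = N ∨ x.2 = -1 ∨ x.2 = M)) := by
  rw [pvRing, PySem.Set.mem_ofList, List.mem_flatMap]
  constructor
  · rintro ⟨r, hr, hx⟩
    rw [List.mem_filterMap] at hx
    obtain ⟨c, hc, hfc⟩ := hx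
    by_cases hcond : r = -1 ∨ r = N ∨ c = -1 ∨ c = M
    · rw [if_pos hcond] at hfc
      have hrc : (r, c) = x := by injection hfc
      obtain ⟨hr1, hr2⟩ := PySem.List.mem_pyRange_one.1 hr
      obtain ⟨hc1, hc2⟩ := PySem.List.mem_pyRange_one.1 hc
      subst hrc
      exact ⟨⟨by omega, by omega, by omega, by omega⟩, by tauto⟩
    · rw [if_neg hcond] at hfc
      cases hfc
  · rintro ⟨⟨b1, b2, b3, b4⟩, hside⟩
    refine ⟨x.1, PySem.List.mem_pyRange_one.2 ⟨b1, by omega⟩, ?_⟩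
    rw [List.mem_filterMap]
    refine ⟨x.2, PySem.List.mem_pyRange_one.2 ⟨b3, by omega⟩, ?_⟩
    rw [if_pos (by tauto)]

theorem pvZ_walk_top (mtx : (Int × Int) → Option Char) (N M : Int)
    (hN : 0 ≤ N) (hM : 0 ≤ M)
    (hout : ∀ p, ¬ pvInnerA N M p → mtx p = none) :
    ∀ n : Nat, (n : Int) ≤ M + 1 → pvZ mtx N M (0, (n : Int)) := by
  intro n
  induction n with
  | zero =>
    intro _
    simpa using pvZ.base (mtx := mtx) (N := N) (M := M)
  | succ k ih =>
    intro hle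
    refine pvZ.step (0, (k : Int)) (0, ((k + 1 : Nat) : Int)) (ih (by push_cast at hle ⊢; omega))
      ?_ (by omega) (hout _ (by rintro ⟨h1, -⟩; omega))
    simp [pvNbrs, Prod.ext_iff]

theorem pvZ_walk_left (mtx : (Int × Int) → Option Char) (N M : Int)
    (hN : 0 ≤ N) (hM : 0 ≤ M)
    (hout : ∀ p, ¬ pvInnerA N M p → mtx p = none) :
    ∀ n : Nat, (n : Int) ≤ N + 1 → pvZ mtx N M ((n : Int), 0) := by
  intro n
  induction n with
  | zero =>
    intro _
    simpa using pvZ.base (mtx := mtx) (N := N) (M := M)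
  | succ k ih =>
    intro hle
    refine pvZ.step ((k : Int), 0) (((k + 1 : Nat) : Int), 0) (ih (by push_cast at hle ⊢; omega))
      ?_ (by omega) (hout _ (by rintro ⟨-, -, h3, -⟩; omega))
    simp [pvNbrs, Prod.ext_iff]

theorem pvZ_walk_bottom (mtx : (Int × Int) → Option Char) (N M : Int)
    (hN : 0 ≤ N) (hM : 0 ≤ M)
    (hout : ∀ p, ¬ pvInnerA N M p → mtx p = none) :
    ∀ n : Nat, (n : Int) ≤ M + 1 → pvZ mtx N M (N + 1, (n : Int)) := by
  intro n
  induction n with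
  | zero =>
    intro _
    have h := pvZ_walk_left mtx N M hN hM hout (N + 1).toNat (by omega)
    rw [Int.toNat_of_nonneg (by omega : (0 : Int) ≤ N + 1)] at h
    simpa using h
  | succ k ih =>
    intro hle
    refine pvZ.step (N + 1, (k : Int)) (N + 1, ((k + 1 : Nat) : Int))
      (ih (by push_cast at hle ⊢; omega))
      ?_ (by omega) (hout _ (by rintro ⟨-, h2, -⟩; omega))
    simp [pvNbrs, Prod.ext_iff]

theorem pvZ_walk_right (mtx : (Int × Int) → Option Char) (N M : Int)
    (hN : 0 ≤ N) (hM : 0 ≤ M)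
    (hout : ∀ p, ¬ pvInnerA N M p → mtx p = none) :
    ∀ n : Nat, (n : Int) ≤ N + 1 → pvZ mtx N M ((n : Int), M + 1) := by
  intro n
  induction n with
  | zero =>
    intro _
    have h := pvZ_walk_top mtx N M hN hM hout (M + 1).toNat (by omega)
    rw [Int.toNat_of_nonneg (by omega : (0 : Int) ≤ M + 1)] at h
    simpa using h
  | succ k ih =>
    intro hle
    refine pvZ.step ((k : Int), M + 1) (((k + 1 : Nat) : Int), M + 1)
      (ih (by push_cast at hle ⊢; omega))
      ?_ (by omega) (hout _ (by rintro ⟨-, -, -, h4⟩; omega))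
    simp [pvNbrs, Prod.ext_iff]

-- on a full grid the outside region is exactly the surrounding ring
theorem pvRing_iff (mtx : (Int × Int) → Option Char) (N M : Int)
    (hN : 0 ≤ N) (hM : 0 ≤ M)
    (hout : ∀ p, ¬ pvInnerA N M p → mtx p = none)
    (hfull : ∀ p, pvInnerA N M p → mtx p ≠ none) :
    ∀ x : Int × Int, x ∈ pvRing N M ↔ pvZ mtx N M (pvSh x) := by
  intro x
  rw [pvRing_mem]
  constructor
  · rintro ⟨⟨b1, b2, b3, b4⟩, hside⟩
    rcases hside with hs | hs | hs | hs
    · have hx : pvSh x = (0, (((x.2 + 1).toNat : Nat) : Int)) := by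
        simp [pvSh, Prod.ext_iff]
        omega
      rw [hx]
      exact pvZ_walk_top mtx N M hN hM hout _ (by omega)
    · have hx : pvSh x = (N + 1, (((x.2 + 1).toNat : Nat) : Int)) := by
        simp [pvSh, Prod.ext_iff]
        omega
      rw [hx]
      exact pvZ_walk_bottom mtx N M hN hM hout _ (by omega)
    · have hx : pvSh x = ((((x.1 + 1).toNat : Nat) : Int), 0) := by
        simp [pvSh, Prod.ext_iff]
        omega
      rw [hx]
      exact pvZ_walk_left mtx N M hN hM hout _ (by omega)
    · have hx : pvSh x = ((((x.1 + 1).toNat : Nat) : Int), M + 1) := by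
        simp [pvSh, Prod.ext_iff]
        omega
      rw [hx]
      exact pvZ_walk_right mtx N M hN hM hout _ (by omega)
  · intro hZ
    have hinb := pvZ_inb hN hM hZ
    have hnone := pvZ_none (hout (0, 0) (by rintro ⟨h1, -⟩; omega)) hZ
    have hni : ¬ pvInnerA N M (pvSh x) := fun hin => hfull _ hin hnone
    simp only [pvSh, pvInb, pvInnerA] at hinb hni
    exact ⟨⟨by omega, by omega, by omega, by omega⟩, by omega⟩

theorem pvInit_sim (storage : List String) (hne : storage ≠ [])
    (hrows : ∀ s ∈ storage, PySem.Str.len (storage.headD "") ≤ PySem.Str.len s) :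
    pvSimRel (storage.length : Int)
      (pvM0 storage)
      (pvMkMatrix storage (storage.length : Int)
        (pvM0 storage),
       (storage.length : Int) * (pvM0 storage))
      (pvGridInit storage (storage.length : Int)
        (pvM0 storage),
       pvRing (storage.length : Int)
        (pvM0 storage)) := by
  obtain ⟨s0, rest, rfl⟩ : ∃ a l, storage = a :: l := by
    cases storage with
    | nil => exact absurd rfl hne
    | cons a l => exact ⟨a, l, rfl⟩
  simp only [pvM0]
  have hN : (0 : Int) ≤ ((s0 :: rest).length : Int) := by positivity
  have hM : (0 : Int) ≤ PySem.Str.len s0 := by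
    rw [PySem.Str.len_eq]
    positivity
  have hcell : ∀ r c : Int, 0 ≤ r → r < ((s0 :: rest).length : Int) → 0 ≤ c →
      c < PySem.Str.len s0 → ∃ ch, pvCellAt (s0 :: rest) r c = some ch := by
    intro r c hr0 hrN hc0 hcM
    have hrow : PySem.List.pyGet? (s0 :: rest) r = ((s0 :: rest)[r.toNat]?) :=
      PySem.List.pyGet?_of_nonneg _ hr0
    have hrlt : r.toNat < (s0 :: rest).length := by omega
    have hs : (s0 :: rest)[r.toNat]? = some ((s0 :: rest)[r.toNat]) :=
      List.getElem?_eq_getElem hrlt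
    have hlen : PySem.Str.len s0 ≤ PySem.Str.len ((s0 :: rest)[r.toNat]) := by
      have := hrows ((s0 :: rest)[r.toNat]) (List.getElem_mem hrlt)
      simpa using this
    rw [PySem.Str.len_eq, PySem.Str.len_eq] at hlen
    rw [PySem.Str.len_eq] at hcM
    unfold pvCellAt
    rw [hrow, hs]
    have hclt : c.toNat < ((s0 :: rest)[r.toNat]).toList.length := by omega
    refine ⟨((s0 :: rest)[r.toNat]).toList[c.toNat], ?_⟩
    show PySem.List.pyGet? ((s0 :: rest)[r.toNat]).toList c = _
    rw [PySem.List.pyGet?_of_nonneg _ hc0]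
    rw [List.getElem?_eq_getElem hclt]
  obtain ⟨hkeys, hget⟩ := pvGridInit_char (s0 :: rest) ((s0 :: rest).length : Int)
    (PySem.Str.len s0) hcell
  have hknd : (pvGridInit (s0 :: rest) ((s0 :: rest).length : Int)
      (PySem.Str.len s0)).keys.Nodup := by
    rw [hkeys]
    exact nodup_pvProd0 _ _
  have hout : ∀ p, ¬ pvInnerA ((s0 :: rest).length : Int) (PySem.Str.len s0) p →
      pvMkMatrix (s0 :: rest) ((s0 :: rest).length : Int) (PySem.Str.len s0) p = none := by
    intro p hp
    unfold pvMkMatrix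
    rw [if_neg hp]
  have hfull : ∀ p, pvInnerA ((s0 :: rest).length : Int) (PySem.Str.len s0) p →
      pvMkMatrix (s0 :: rest) ((s0 :: rest).length : Int) (PySem.Str.len s0) p ≠ none := by
    intro p hp
    unfold pvMkMatrix
    rw [if_pos hp]
    obtain ⟨a, b, c, d⟩ := hp
    obtain ⟨ch, hch⟩ := hcell (p.1 - 1) (p.2 - 1) (by omega) (by omega) (by omega) (by omega)
    rw [hch]
    simp
  refine ⟨?_, hknd, ?_, PySem.Set.nodup_ofList _, ?_, ?_⟩
  · -- the matrix and the dict agree (shifted by one)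
    intro x
    simp only
    rw [hget x]
    unfold pvMkMatrix
    by_cases hx : 0 ≤ x.1 ∧ x.1 < ((s0 :: rest).length : Int) ∧ 0 ≤ x.2 ∧
        x.2 < PySem.Str.len s0
    · rw [if_pos (by simp only [pvSh]; omega), if_pos hx]
      have h1 : (pvSh x).1 - 1 = x.1 := by simp [pvSh]
      have h2 : (pvSh x).2 - 1 = x.2 := by simp [pvSh]
      rw [h1, h2]
    · rw [if_neg (by simp only [pvSh]; omega), if_neg hx]
  · -- all keys lie in the grid rectangle
    intro k hk
    rw [hkeys] at hk
    exact mem_pvProd0.1 hk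
  · -- the initial outside region is the ring
    intro x
    simp only
    exact pvRing_iff _ _ _ hN hM hout hfull x
  · -- the initial count equals the dict size
    simp only
    have h0 : (pvGridInit (s0 :: rest) ((s0 :: rest).length : Int)
        (PySem.Str.len s0)).size = (pvGridInit (s0 :: rest) ((s0 :: rest).length : Int)
        (PySem.Str.len s0)).keys.length := by
      show (pvGridInit _ _ _).items.length = ((pvGridInit _ _ _).items.map (·.1)).length
      rw [List.length_map]
    rw [h0, hkeys, length_pvProd0, Int.toNat_of_nonneg hN, Int.toNat_of_nonneg hM]

-- ===== VERDICT (by name: the statement is the Claim_ definition above) =====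
set_option maxHeartbeats 2000000 in
theorem solution_spec : Claim_equal_solution := by
  intro storage requests _hdom hpre
  unfold Spec_solution
  obtain ⟨hne, hrows, hreqs⟩ := hpre
  have hN : (0 : Int) ≤ (storage.length : Int) := by positivity
  have hM : (0 : Int) ≤ (pvM0 storage) := by
    cases storage with
    | nil => simp [pvM0]
    | cons s l =>
      simp only [pvM0]
      rw [PySem.Str.len_eq]
      positivity
  show (requests.foldl (fun (st : ((Int × Int) → Option Char) × Int) req =>
      ((pvSearchA st.1 req (storage.length : Int)
          (pvM0 storage)).1,
       st.2 - (pvSearchA st.1 req (storage.length : Int)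
          (pvM0 storage)).2))
      (pvMkMatrix storage (storage.length : Int)
        (pvM0 storage),
       (storage.length : Int) *
        (pvM0 storage))).2 =
    ((PySem.Dict.size (requests.foldl (pvStepB (storage.length : Int)
        (pvM0 storage))
      (pvGridInit storage (storage.length : Int)
        (pvM0 storage),
       pvRing (storage.length : Int)
        (pvM0 storage))).1 : Int))
  have hmain : ∀ (reqs : List String), (∀ r ∈ reqs, r ≠ "") →
      ∀ (a : ((Int × Int) → Option Char) × Int)
        (b : PySem.Dict (Int × Int) Char × PySem.Set (Int × Int)),
      pvSimRel (storage.length : Int)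
        (pvM0 storage) a b →
      pvSimRel (storage.length : Int)
        (pvM0 storage)
        (reqs.foldl (fun (st : ((Int × Int) → Option Char) × Int) req =>
          ((pvSearchA st.1 req (storage.length : Int)
              (pvM0 storage)).1,
           st.2 - (pvSearchA st.1 req (storage.length : Int)
              (pvM0 storage)).2)) a)
        (reqs.foldl (pvStepB (storage.length : Int)
          (pvM0 storage)) b) := by
    intro reqs
    induction reqs with
    | nil =>
      intro _ a b h
      simpa using h
    | cons r rs ih =>
      intro hr a b h
      simp only [List.foldl_cons]
      apply ih (fun x hx => hr x (by simp [hx]))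
      exact pvStep_sim (storage.length : Int)
        (pvM0 storage) hN hM a.1 a.2 b.1 b.2
        h r (hr r (by simp))
  have hfin := hmain requests hreqs _ _ (pvInit_sim storage hne hrows)
  exact hfin.2.2.2.2.2
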